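-- pv_equiv track=rewrite | github.com/Tokymin/Python_Learn | HW2/T2.py | bfs
-- ===== SOURCE A (Python) =====
-- from queue import PriorityQueue
--
-- def bfs(grid, Th):
--     M, N = len(grid), len(grid[0])
--     visited = [[False]*N for _ in range(M)]
--     q = PriorityQueue()
--     q.put((0, 0, 0))
--     while not q.empty():
--         dist, x, y = q.get()
--         if x == M-1 and y == N-1:
--             return dist
--         for dx, dy in [(-1, 0), (1, 0), (0, -1), (0, 1)]:
--             nx, ny = x + dx, y + dy
--             if 0 <= nx < M and 0 <= ny < N and not visited[nx][ny] and grid[nx][ny] >= Th: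
--                 visited[nx][ny] = True
--                 q.put((dist+1, nx, ny))
--     return 0
-- ===== SOURCE B (Python) =====
-- def bfs(grid, Th):
--     # Bellman-Ford dynamic programming: relax a full distance table until it
--     # stabilises, instead of searching with a queue.
--     M, N = len(grid), len(grid[0])
--     INF = M * N
--     dist = [[INF] * N for _ in range(M)]
--     dist[0][0] = 0
--     for _ in range(M * N):
--         new = []
--         for x in range(M):
--             row = []
--             for y in range(N):
--                 d = dist[x][y]
--                 if (x or y) and grid[x][y] >= Th:
--                     for nx, ny in ((x - 1, y), (x + 1, y), (x, y - 1), (x, y + 1)):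
--                         if 0 <= nx < M and 0 <= ny < N and dist[nx][ny] + 1 < d:
--                             d = dist[nx][ny] + 1
--                 row.append(d)
--             new.append(row)
--         if new == dist:
--             break
--         dist = new
--     d = dist[M - 1][N - 1]
--     return d if d < INF else 0
-- ===== Notes on version B (the rewrite author's own statement) =====
-- stated objective: alternative
-- what changed: A runs Dijkstra with a PriorityQueue; B replaces the search entirely by Bellman-Ford dynamic programming: a distance table initialised to INF, relaxed in full Jacobi sweeps until it stabilises, with the answer read off at the target cell (no queue, no frontier, no visited set).
-- outside the precondition, e.g. on bfs([[]], 0): A returns 0, B raises IndexError; on bfs([[5, 5], [1]], 9): A returns 0, B raises IndexError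
import Mathlib
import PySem

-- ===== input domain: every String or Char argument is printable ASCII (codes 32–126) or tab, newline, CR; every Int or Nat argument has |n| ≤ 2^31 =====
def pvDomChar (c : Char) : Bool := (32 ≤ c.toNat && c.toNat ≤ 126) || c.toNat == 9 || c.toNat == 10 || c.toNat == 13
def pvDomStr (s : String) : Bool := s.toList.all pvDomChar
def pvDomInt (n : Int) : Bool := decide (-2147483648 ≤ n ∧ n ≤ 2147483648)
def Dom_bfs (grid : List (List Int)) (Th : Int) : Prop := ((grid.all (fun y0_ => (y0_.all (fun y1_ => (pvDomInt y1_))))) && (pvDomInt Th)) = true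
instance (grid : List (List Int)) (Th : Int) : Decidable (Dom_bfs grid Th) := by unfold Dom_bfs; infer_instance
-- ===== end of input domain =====

-- B replaces A's PriorityQueue Dijkstra by Bellman-Ford dynamic programming: a full
-- distance table relaxed in Jacobi sweeps until stable; same return value on Pre_.

-- ===== PORT A =====
-- grid[x][y]: indices are guarded by 0 ≤ x < len(grid), 0 ≤ y < N before every access,
-- so getD with toNat is exact there (Pre_bfs restricts to rectangular-enough grids).
def rowGet (g : List (List Int)) (x y : Int) : Int := (g.getD x.toNat []).getD y.toNat 0

-- visited[x][y] (2-D bool list); accesses are bounds-guarded, so toNat/getD/set are exact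
def get2 (vis : List (List Bool)) (x y : Int) : Bool := (vis.getD x.toNat []).getD y.toNat false

def set2 (vis : List (List Bool)) (x y : Int) : List (List Bool) :=
  vis.set x.toNat ((vis.getD x.toNat []).set y.toNat true)

-- tuple comparison used by PriorityQueue on (dist, x, y)
abbrev pqLe (a b : Int × Int × Int) : Prop :=
  a.1 < b.1 ∨ (a.1 = b.1 ∧ (a.2.1 < b.2.1 ∨ (a.2.1 = b.2.1 ∧ a.2.2 ≤ b.2.2)))

-- PriorityQueue modelled as a list kept sorted; q.put = sorted insert, q.get = head
def pqInsert (e : Int × Int × Int) : List (Int × Int × Int) → List (Int × Int × Int)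
  | [] => [e]
  | f :: rest => if pqLe e f then e :: f :: rest else f :: pqInsert e rest

def offsets : List (Int × Int) := [(-1, 0), (1, 0), (0, -1), (0, 1)]

-- body of A's inner `for dx, dy in [...]` loop
def stepA (g : List (List Int)) (t M N dist x y : Int)
    (p : List (Int × Int × Int) × List (List Bool)) (o : Int × Int) :
    List (Int × Int × Int) × List (List Bool) :=
  let nx := x + o.1
  let ny := y + o.2
  if 0 ≤ nx ∧ nx < M ∧ 0 ≤ ny ∧ ny < N ∧ get2 p.2 nx ny = false ∧ rowGet g nx ny ≥ t then
    (pqInsert (dist + 1, nx, ny) p.1, set2 p.2 nx ny)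
  else p

-- A's `while not q.empty()` loop; fuel only makes it total (pops ≤ M*N+2, proved below)
def bfsLoopA (g : List (List Int)) (t M N : Int) :
    Nat → List (Int × Int × Int) → List (List Bool) → Int
  | 0, _, _ => 0
  | _ + 1, [], _ => 0
  | fuel + 1, (dist, x, y) :: rest, vis =>
    if x = M - 1 ∧ y = N - 1 then dist
    else
      let st := offsets.foldl (stepA g t M N dist x y) (rest, vis)
      bfsLoopA g t M N fuel st.1 st.2

def bfs (grid : List (List Int)) (Th : Int) : Int :=
  let Mn := grid.length
  let Nn := (grid.headI).length   -- len(grid[0]); Pre_bfs excludes grid = [] where Python raises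
  bfsLoopA grid Th (Mn : Int) (Nn : Int) (Mn * Nn + 3) [(0, 0, 0)]
    (List.replicate Mn (List.replicate Nn false))

-- ===== PORT B =====
-- Source B's inner `for nx, ny in ...` relaxation loop over the four neighbours
def dpRelax (dist : List (List Int)) (M N x y : Int) : Int :=
  [(x - 1, y), (x + 1, y), (x, y - 1), (x, y + 1)].foldl
    (fun d n =>
      if 0 ≤ n.1 ∧ n.1 < M ∧ 0 ≤ n.2 ∧ n.2 < N ∧ rowGet dist n.1 n.2 + 1 < d then
        rowGet dist n.1 n.2 + 1
      else d)
    (rowGet dist x y)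

-- one cell of a sweep: `(x or y) and grid[x][y] >= Th` guard, else keep old value
def dpCell (g dist : List (List Int)) (t M N x y : Int) : Int :=
  if ¬(x = 0 ∧ y = 0) ∧ rowGet g x y ≥ t then dpRelax dist M N x y
  else rowGet dist x y

-- one full Jacobi sweep building `new` row by row (the Python append loops)
def dpRound (g dist : List (List Int)) (t : Int) (Mn Nn : Nat) : List (List Int) :=
  (List.range Mn).map (fun (x : Nat) =>
    (List.range Nn).map (fun (y : Nat) => dpCell g dist t (Mn : Int) (Nn : Int) ((x : Nat) : Int) ((y : Nat) : Int)))

-- Source B's `for _ in range(M*N)` loop with the `if new == dist: break` early exit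
def dpLoop (g : List (List Int)) (t : Int) (Mn Nn : Nat) :
    Nat → List (List Int) → List (List Int)
  | 0, dist => dist
  | k + 1, dist =>
    let nd := dpRound g dist t Mn Nn
    if nd = dist then dist else dpLoop g t Mn Nn k nd

def bfs_alt (grid : List (List Int)) (Th : Int) : Int :=
  let Mn := grid.length
  let Nn := (grid.headI).length
  let I : Int := (Mn : Int) * (Nn : Int)
  let dist0 := (List.replicate Mn (List.replicate Nn I)).set 0
    ((List.replicate Nn I).set 0 0)        -- dist[0][0] = 0
  let final := dpLoop grid Th Mn Nn (Mn * Nn) dist0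
  let d := rowGet final ((Mn : Int) - 1) ((Nn : Int) - 1)
  if d < I then d else 0

-- ===== PRECONDITION & SPEC =====
-- Pre_bfs excludes the empty grid and grids whose first row is empty, where A returns 0
-- only because its loop finds no cells while B's distance table has no entry to index
-- (B raises IndexError); and grids with a row shorter than grid[0], on which B (which
-- reads every in-bounds cell) raises IndexError while A raises on most and returns 0 on
-- the few whose short rows its search never reaches.
def Pre_bfs (grid : List (List Int)) (Th : Int) : Prop :=
  grid ≠ [] ∧ grid.headI ≠ [] ∧ ∀ row ∈ grid, (grid.headI).length ≤ row.length

instance (grid : List (List Int)) (Th : Int) : Decidable (Pre_bfs grid Th) := by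
  unfold Pre_bfs; infer_instance

def pvWitness_bfs : List (List Int) × Int := ([[1, 2], [3, 4]], 0)

def Spec_bfs (grid : List (List Int)) (Th : Int) (out : Int) : Prop := out = bfs_alt grid Th
instance (grid : List (List Int)) (Th : Int) (out : Int) : Decidable (Spec_bfs grid Th out) := by
  unfold Spec_bfs; infer_instance

-- ===== CLAIM (what is proved, stated in full; the proofs are below) =====
def Claim_equal_bfs : Prop := ∀ (grid : List (List Int)) (Th : Int), Dom_bfs grid Th → Pre_bfs grid Th → Spec_bfs grid Th (bfs grid Th)

-- ===== LEMMAS AND PROOFS =====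

-- cell passes the bounds-and-threshold test
abbrev okc (g : List (List Int)) (t M N : Int) (n : Int × Int) : Prop :=
  0 ≤ n.1 ∧ n.1 < M ∧ 0 ≤ n.2 ∧ n.2 < N ∧ rowGet g n.1 n.2 ≥ t

def nbrs (c : Int × Int) : List (Int × Int) := offsets.map (fun o => (c.1 + o.1, c.2 + o.2))

-- generic expansion of one cell's neighbour list, parametrised by the two "insert" ops
def innerF (g : List (List Int)) (t M N : Int)
    (insV insA : (Int × Int) → List (Int × Int) → List (Int × Int))
    (st : List (Int × Int) × List (Int × Int)) (L : List (Int × Int)) :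
    List (Int × Int) × List (Int × Int) :=
  L.foldl (fun st n => if okc g t M N n ∧ n ∉ st.1 then (insV n st.1, insA n st.2) else st) st

def lvlF (g : List (List Int)) (t M N : Int)
    (insV insA : (Int × Int) → List (Int × Int) → List (Int × Int))
    (st : List (Int × Int) × List (Int × Int)) (F : List (Int × Int)) :
    List (Int × Int) × List (Int × Int) :=
  F.foldl (fun st c => innerF g t M N insV insA st (nbrs c)) st

def consV (n : Int × Int) (l : List (Int × Int)) : List (Int × Int) := n :: l
def appA (n : Int × Int) (l : List (Int × Int)) : List (Int × Int) := l ++ [n]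
def pairIns (n : Int × Int) : List (Int × Int) → List (Int × Int)
  | [] => [n]
  | f :: rest =>
    if n.1 < f.1 ∨ (n.1 = f.1 ∧ n.2 ≤ f.2) then n :: f :: rest else f :: pairIns n rest

def InsSpec (ins : (Int × Int) → List (Int × Int) → List (Int × Int)) : Prop :=
  ∀ x n l, x ∈ ins n l ↔ x = n ∨ x ∈ l

def LenSpec (ins : (Int × Int) → List (Int × Int) → List (Int × Int)) : Prop :=
  ∀ n l, (ins n l).length = l.length + 1

-- per-pop reference: A's loop with the queue abstracted into (level-d remainder F,
-- level-(d+1) accumulator G) and visited abstracted into a list V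
def refA (g : List (List Int)) (t M N : Int) :
    Nat → Int → List (Int × Int) → List (Int × Int) → List (Int × Int) → Int
  | 0, _, _, _, _ => 0
  | _ + 1, _, _, [], [] => 0
  | fuel + 1, d, V, [], c :: G' =>
    if c = (M - 1, N - 1) then d + 1
    else
      let st := innerF g t M N consV pairIns (V, []) (nbrs c)
      refA g t M N fuel (d + 1) st.1 G' st.2
  | fuel + 1, d, V, c :: F', G =>
    if c = (M - 1, N - 1) then d
    else
      let st := innerF g t M N consV pairIns (V, G) (nbrs c)
      refA g t M N fuel d st.1 F' st.2

-- per-level reference: the common abstraction both ports are reduced to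
def levelRec (g : List (List Int)) (t M N : Int) :
    Nat → Int → List (Int × Int) → List (Int × Int) → Int
  | 0, _, _, _ => 0
  | fuel + 1, d, V, F =>
    if (M - 1, N - 1) ∈ F then d
    else if F = [] then 0
    else
      let st := lvlF g t M N consV appA (V, []) F
      levelRec g t M N fuel (d + 1) st.1 st.2

-- universe of in-bounds cells and the count of unvisited ones (termination measure)
def univ (Mn Nn : Nat) : List (Int × Int) :=
  (List.range Mn).flatMap (fun (i : Nat) => (List.range Nn).map (fun (j : Nat) => (((i : Nat) : Int), ((j : Nat) : Int))))

def unvis (Mn Nn : Nat) (V : List (Int × Int)) : Nat :=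
  ((univ Mn Nn).filter (fun c => decide (c ∉ V))).length

theorem insSpec_consV : InsSpec consV := by
  intro x n l; simp [consV]

theorem insSpec_appA : InsSpec appA := by
  intro x n l; simp [appA]; tauto

theorem insSpec_pairIns : InsSpec pairIns := by
  intro x n l
  induction l with
  | nil => simp [pairIns]
  | cons f rest ih =>
    simp only [pairIns]
    split
    · simp
    · simp [ih]; tauto

theorem lenSpec_pairIns : LenSpec pairIns := by
  intro n l
  induction l with
  | nil => simp [pairIns]
  | cons f rest ih =>
    simp only [pairIns]
    split
    · simp
    · simp [ih]

theorem mem_univ_iff (Mn Nn : Nat) (c : Int × Int) :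
    c ∈ univ Mn Nn ↔ 0 ≤ c.1 ∧ c.1 < (Mn : Int) ∧ 0 ≤ c.2 ∧ c.2 < (Nn : Int) := by
  obtain ⟨a, b⟩ := c
  constructor
  · intro hmem
    unfold univ at hmem
    obtain ⟨i, hi, hmem2⟩ := List.mem_flatMap.mp hmem
    obtain ⟨j, hj, hEq⟩ := List.mem_map.mp hmem2
    rw [List.mem_range] at hi
    rw [List.mem_range] at hj
    simp only [Prod.mk.injEq] at hEq
    obtain ⟨h1, h2⟩ := hEq
    subst h1; subst h2
    refine ⟨Int.natCast_nonneg i, ?_, Int.natCast_nonneg j, ?_⟩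
    · show (i : Int) < (Mn : Int)
      exact_mod_cast hi
    · show (j : Int) < (Nn : Int)
      exact_mod_cast hj
  · rintro ⟨h1, h2, h3, h4⟩
    have h1' : 0 ≤ a := h1
    have h2' : a < (Mn : Int) := h2
    have h3' : 0 ≤ b := h3
    have h4' : b < (Nn : Int) := h4
    have hm : ((a.toNat : Int), (b.toNat : Int)) ∈ univ Mn Nn := by
      unfold univ
      refine List.mem_flatMap.mpr ⟨a.toNat, ?_, ?_⟩
      · exact List.mem_range.mpr (by omega)
      · exact List.mem_map.mpr ⟨b.toNat, List.mem_range.mpr (by omega), rfl⟩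
    have heq : ((a.toNat : Int), (b.toNat : Int)) = (a, b) := by
      simp only [Prod.mk.injEq]; constructor <;> omega
    rwa [heq] at hm

theorem univ_length (Mn Nn : Nat) : (univ Mn Nn).length = Mn * Nn := by
  simp [univ]

theorem filter_len_mono {α : Type} (l : List α) (p q : α → Bool)
    (h : ∀ x ∈ l, p x = true → q x = true) :
    (l.filter p).length ≤ (l.filter q).length := by
  induction l with
  | nil => simp
  | cons a l ih =>
    have ha := h a (by simp)
    have ih' := ih (fun x hx => h x (by simp [hx]))
    by_cases hp : p a = true
    · simp [List.filter, hp, ha hp]; omega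
    · simp only [List.filter]
      rw [Bool.not_eq_true] at hp
      rw [hp]
      cases hq : q a
      · exact ih'
      · simp; omega

theorem filter_len_lt {α : Type} (l : List α) (p q : α → Bool)
    (h : ∀ x ∈ l, p x = true → q x = true) (y : α) (hy : y ∈ l)
    (hq : q y = true) (hp : p y = false) :
    (l.filter p).length < (l.filter q).length := by
  induction l with
  | nil => simp at hy
  | cons a l ih =>
    have ha := h a (by simp)
    have hmono := filter_len_mono l p q (fun x hx => h x (by simp [hx]))
    rcases List.mem_cons.mp hy with rfl | hy'
    · simp only [List.filter]
      rw [hp, hq]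
      simp
      omega
    · have ih' := ih (fun x hx => h x (by simp [hx])) hy'
      by_cases hpa : p a = true
      · simp [List.filter, hpa, ha hpa]; omega
      · simp only [List.filter]
        rw [Bool.not_eq_true] at hpa
        rw [hpa]
        cases hqa : q a
        · exact ih'
        · simp; omega

theorem unvis_lt (Mn Nn : Nat) (V V' : List (Int × Int))
    (h : ∀ x, x ∈ V → x ∈ V') (y : Int × Int) (hy : y ∈ univ Mn Nn)
    (hyV : y ∉ V) (hyV' : y ∈ V') : unvis Mn Nn V' < unvis Mn Nn V := by
  have h' : ∀ x ∈ univ Mn Nn, decide (x ∉ V') = true → decide (x ∉ V) = true := by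
    intro x _ hx
    simp only [decide_eq_true_eq] at hx ⊢
    exact fun hxV => hx (h x hxV)
  exact filter_len_lt _ _ _ h' y hy (by simpa using hyV) (by simpa using hyV')

theorem unvis_congr (Mn Nn : Nat) (V V' : List (Int × Int))
    (h : ∀ x, x ∈ V ↔ x ∈ V') : unvis Mn Nn V = unvis Mn Nn V' := by
  unfold unvis
  congr 1
  apply List.filter_congr
  intro x _
  simp [h x]

-- characterisations of innerF / lvlF
theorem innerF_step_pos (g : List (List Int)) (t M N : Int) (insV insA)
    (n : Int × Int) (rest : List (Int × Int)) (st : List (Int × Int) × List (Int × Int))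
    (h : okc g t M N n ∧ n ∉ st.1) :
    innerF g t M N insV insA st (n :: rest)
      = innerF g t M N insV insA (insV n st.1, insA n st.2) rest := by
  simp only [innerF, List.foldl_cons, if_pos h]

theorem innerF_step_neg (g : List (List Int)) (t M N : Int) (insV insA)
    (n : Int × Int) (rest : List (Int × Int)) (st : List (Int × Int) × List (Int × Int))
    (h : ¬ (okc g t M N n ∧ n ∉ st.1)) :
    innerF g t M N insV insA st (n :: rest) = innerF g t M N insV insA st rest := by
  simp only [innerF, List.foldl_cons, if_neg h]

theorem innerF_fst_mem (g : List (List Int)) (t M N : Int) (insV insA)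
    (hV : InsSpec insV) (hA : InsSpec insA) (L : List (Int × Int))
    (st : List (Int × Int) × List (Int × Int)) (x : Int × Int) :
    x ∈ (innerF g t M N insV insA st L).1 ↔ x ∈ st.1 ∨ (x ∈ L ∧ okc g t M N x) := by
  induction L generalizing st with
  | nil => simp [innerF]
  | cons n rest ih =>
    by_cases h : okc g t M N n ∧ n ∉ st.1
    · rw [innerF_step_pos g t M N insV insA n rest st h, ih]
      constructor
      · rintro (hv | hrest)
        · rcases (hV x n st.1).mp hv with rfl | hv'
          · exact Or.inr ⟨List.mem_cons_self, h.1⟩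
          · exact Or.inl hv'
        · exact Or.inr ⟨List.mem_cons_of_mem _ hrest.1, hrest.2⟩
      · rintro (hv | ⟨hmem, hok⟩)
        · exact Or.inl ((hV x n st.1).mpr (Or.inr hv))
        · rcases List.mem_cons.mp hmem with rfl | hm
          · exact Or.inl ((hV x x st.1).mpr (Or.inl rfl))
          · exact Or.inr ⟨hm, hok⟩
    · rw [innerF_step_neg g t M N insV insA n rest st h, ih]
      constructor
      · rintro (hv | hr)
        · exact Or.inl hv
        · exact Or.inr ⟨List.mem_cons_of_mem _ hr.1, hr.2⟩
      · rintro (hv | ⟨hm, hok⟩)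
        · exact Or.inl hv
        · rcases List.mem_cons.mp hm with rfl | hm'
          · exact Or.inl (by tauto)
          · exact Or.inr ⟨hm', hok⟩

theorem innerF_snd_mem (g : List (List Int)) (t M N : Int) (insV insA)
    (hV : InsSpec insV) (hA : InsSpec insA) (L : List (Int × Int))
    (st : List (Int × Int) × List (Int × Int)) (x : Int × Int) :
    x ∈ (innerF g t M N insV insA st L).2 ↔
      x ∈ st.2 ∨ (x ∈ L ∧ okc g t M N x ∧ x ∉ st.1) := by
  induction L generalizing st with
  | nil => simp [innerF]
  | cons n rest ih =>
    by_cases h : okc g t M N n ∧ n ∉ st.1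
    · rw [innerF_step_pos g t M N insV insA n rest st h, ih]
      constructor
      · rintro (hv | ⟨hm, hok, hnv⟩)
        · rcases (hA x n st.2).mp hv with rfl | hv'
          · exact Or.inr ⟨List.mem_cons_self, h.1, h.2⟩
          · exact Or.inl hv'
        · have hne : x ≠ n ∧ x ∉ st.1 := by
            constructor
            · rintro rfl; exact hnv ((hV x x st.1).mpr (Or.inl rfl))
            · intro hx; exact hnv ((hV x n st.1).mpr (Or.inr hx))
          exact Or.inr ⟨List.mem_cons_of_mem _ hm, hok, hne.2⟩
      · rintro (hv | ⟨hm, hok, hnv⟩)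
        · exact Or.inl ((hA x n st.2).mpr (Or.inr hv))
        · by_cases hxn : x = n
          · subst hxn
            exact Or.inl ((hA x x st.2).mpr (Or.inl rfl))
          · rcases List.mem_cons.mp hm with rfl | hm'
            · exact absurd rfl hxn
            · refine Or.inr ⟨hm', hok, ?_⟩
              intro hx
              rcases (hV x n st.1).mp hx with rfl | hx'
              · exact hxn rfl
              · exact hnv hx'
    · rw [innerF_step_neg g t M N insV insA n rest st h, ih]
      constructor
      · rintro (hv | ⟨hm, hok, hnv⟩)
        · exact Or.inl hv
        · exact Or.inr ⟨List.mem_cons_of_mem _ hm, hok, hnv⟩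
      · rintro (hv | ⟨hm, hok, hnv⟩)
        · exact Or.inl hv
        · rcases List.mem_cons.mp hm with rfl | hm'
          · exact absurd ⟨hok, hnv⟩ h
          · exact Or.inr ⟨hm', hok, hnv⟩

theorem lvlF_fst_mem (g : List (List Int)) (t M N : Int) (insV insA)
    (hV : InsSpec insV) (hA : InsSpec insA) (F : List (Int × Int))
    (st : List (Int × Int) × List (Int × Int)) (x : Int × Int) :
    x ∈ (lvlF g t M N insV insA st F).1 ↔
      x ∈ st.1 ∨ ((∃ c ∈ F, x ∈ nbrs c) ∧ okc g t M N x) := by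
  induction F generalizing st with
  | nil => simp [lvlF]
  | cons c F ih =>
    have hstep : lvlF g t M N insV insA st (c :: F)
        = lvlF g t M N insV insA (innerF g t M N insV insA st (nbrs c)) F := by
      simp only [lvlF, List.foldl_cons]
    rw [hstep, ih, innerF_fst_mem g t M N insV insA hV hA]
    simp only [List.exists_mem_cons_iff]
    tauto

theorem lvlF_snd_mem (g : List (List Int)) (t M N : Int) (insV insA)
    (hV : InsSpec insV) (hA : InsSpec insA) (F : List (Int × Int))
    (st : List (Int × Int) × List (Int × Int)) (x : Int × Int) :
    x ∈ (lvlF g t M N insV insA st F).2 ↔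
      x ∈ st.2 ∨ ((∃ c ∈ F, x ∈ nbrs c) ∧ okc g t M N x ∧ x ∉ st.1) := by
  induction F generalizing st with
  | nil => simp [lvlF]
  | cons c F ih =>
    have hstep : lvlF g t M N insV insA st (c :: F)
        = lvlF g t M N insV insA (innerF g t M N insV insA st (nbrs c)) F := by
      simp only [lvlF, List.foldl_cons]
    rw [hstep, ih, innerF_snd_mem g t M N insV insA hV hA]
    simp only [innerF_fst_mem g t M N insV insA hV hA, List.exists_mem_cons_iff]
    tauto

theorem lvlF_fst_super (g : List (List Int)) (t M N : Int) (insV insA)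
    (hV : InsSpec insV) (hA : InsSpec insA) (F : List (Int × Int))
    (st : List (Int × Int) × List (Int × Int)) (x : Int × Int)
    (hx : x ∈ st.1) : x ∈ (lvlF g t M N insV insA st F).1 :=
  (lvlF_fst_mem g t M N insV insA hV hA F st x).mpr (Or.inl hx)

theorem innerF_measure (g : List (List Int)) (t M N : Int) (Mn Nn : Nat)
    (hM : M = (Mn : Int)) (hN : N = (Nn : Int)) (insV insA)
    (hV : InsSpec insV) (hLA : LenSpec insA) (L : List (Int × Int))
    (st : List (Int × Int) × List (Int × Int)) :
    (innerF g t M N insV insA st L).2.length + unvis Mn Nn (innerF g t M N insV insA st L).1 ≤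
      st.2.length + unvis Mn Nn st.1 := by
  induction L generalizing st with
  | nil => simp [innerF]
  | cons n rest ih =>
    by_cases h : okc g t M N n ∧ n ∉ st.1
    · rw [innerF_step_pos g t M N insV insA n rest st h]
      refine le_trans (ih (insV n st.1, insA n st.2)) ?_
      have hlen : (insA n st.2).length = st.2.length + 1 := hLA n st.2
      have hu : unvis Mn Nn (insV n st.1) < unvis Mn Nn st.1 := by
        refine unvis_lt Mn Nn st.1 (insV n st.1)
          (fun y hy => (hV y n st.1).mpr (Or.inr hy)) n ?_ h.2 ((hV n n st.1).mpr (Or.inl rfl))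
        obtain ⟨hb1, hb2, hb3, hb4, _⟩ := h.1
        rw [mem_univ_iff]
        exact ⟨hb1, hM ▸ hb2, hb3, hN ▸ hb4⟩
      simp only [hlen]
      omega
    · rw [innerF_step_neg g t M N insV insA n rest st h]
      exact ih st

theorem lvlF_measure (g : List (List Int)) (t M N : Int) (Mn Nn : Nat)
    (hM : M = (Mn : Int)) (hN : N = (Nn : Int)) (insV insA)
    (hV : InsSpec insV) (hLA : LenSpec insA) (F : List (Int × Int))
    (st : List (Int × Int) × List (Int × Int)) :
    (lvlF g t M N insV insA st F).2.length + unvis Mn Nn (lvlF g t M N insV insA st F).1 ≤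
      st.2.length + unvis Mn Nn st.1 := by
  induction F generalizing st with
  | nil => simp [lvlF]
  | cons c F ih =>
    have hstep : lvlF g t M N insV insA st (c :: F)
        = lvlF g t M N insV insA (innerF g t M N insV insA st (nbrs c)) F := by
      simp only [lvlF, List.foldl_cons]
    rw [hstep]
    exact le_trans (ih (innerF g t M N insV insA st (nbrs c)))
      (innerF_measure g t M N Mn Nn hM hN insV insA hV hLA (nbrs c) st)

theorem levelRec_congr (g : List (List Int)) (t M N : Int) (fuel : Nat) (d : Int)
    (V V' F F' : List (Int × Int))
    (hv : ∀ x, x ∈ V ↔ x ∈ V') (hf : ∀ x, x ∈ F ↔ x ∈ F') :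
    levelRec g t M N fuel d V F = levelRec g t M N fuel d V' F' := by
  induction fuel generalizing d V V' F F' with
  | zero => rfl
  | succ fuel ih =>
    simp only [levelRec]
    have hnil : (F = []) ↔ (F' = []) := by
      simp only [List.eq_nil_iff_forall_not_mem]
      exact ⟨fun h x => (hf x).not.mp (h x), fun h x => (hf x).not.mpr (h x)⟩
    by_cases h1 : (M - 1, N - 1) ∈ F'
    · rw [if_pos ((hf _).mpr h1), if_pos h1]
    · rw [if_neg (fun h => h1 ((hf _).mp h)), if_neg h1]
      by_cases h2 : F' = []
      · rw [if_pos (hnil.mpr h2), if_pos h2]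
      · rw [if_neg (fun h => h2 (hnil.mp h)), if_neg h2]
        apply ih
        · intro x
          rw [lvlF_fst_mem g t M N consV appA insSpec_consV insSpec_appA,
            lvlF_fst_mem g t M N consV appA insSpec_consV insSpec_appA]
          constructor
          · rintro (hx | ⟨⟨c, hc, hn⟩, hok⟩)
            · exact Or.inl ((hv x).mp hx)
            · exact Or.inr ⟨⟨c, (hf c).mp hc, hn⟩, hok⟩
          · rintro (hx | ⟨⟨c, hc, hn⟩, hok⟩)
            · exact Or.inl ((hv x).mpr hx)
            · exact Or.inr ⟨⟨c, (hf c).mpr hc, hn⟩, hok⟩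
        · intro x
          rw [lvlF_snd_mem g t M N consV appA insSpec_consV insSpec_appA,
            lvlF_snd_mem g t M N consV appA insSpec_consV insSpec_appA]
          constructor
          · rintro (hx | ⟨⟨c, hc, hn⟩, hok, hnv⟩)
            · simp at hx
            · exact Or.inr ⟨⟨c, (hf c).mp hc, hn⟩, hok, fun hx => hnv ((hv x).mpr hx)⟩
          · rintro (hx | ⟨⟨c, hc, hn⟩, hok, hnv⟩)
            · simp at hx
            · exact Or.inr ⟨⟨c, (hf c).mpr hc, hn⟩, hok, fun hx => hnv ((hv x).mp hx)⟩

-- next frontier is nonempty → strictly fewer unvisited cells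
theorem lvl_unvis_lt (g : List (List Int)) (t M N : Int) (Mn Nn : Nat)
    (hM : M = (Mn : Int)) (hN : N = (Nn : Int)) (insV insA)
    (hV : InsSpec insV) (hA : InsSpec insA)
    (V F : List (Int × Int)) (y : Int × Int)
    (hy : y ∈ (lvlF g t M N insV insA (V, []) F).2) :
    unvis Mn Nn (lvlF g t M N insV insA (V, []) F).1 < unvis Mn Nn V := by
  have hy2 := (lvlF_snd_mem g t M N insV insA hV hA F (V, []) y).mp hy
  simp only [List.not_mem_nil, false_or] at hy2
  obtain ⟨hadj, hok, hnv⟩ := hy2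
  refine unvis_lt Mn Nn V _ ?_ y ?_ hnv ?_
  · exact fun x hx => lvlF_fst_super g t M N insV insA hV hA F (V, []) x hx
  · obtain ⟨hb1, hb2, hb3, hb4, _⟩ := hok
    rw [mem_univ_iff]
    exact ⟨hb1, hM ▸ hb2, hb3, hN ▸ hb4⟩
  · exact (lvlF_fst_mem g t M N insV insA hV hA F (V, []) y).mpr (Or.inr ⟨hadj, hok⟩)

theorem refA_target (g : List (List Int)) (t M N : Int) :
    ∀ (F : List (Int × Int)) (f : Nat) (d : Int) (V G : List (Int × Int)),
      (M - 1, N - 1) ∈ F → F.length ≤ f → refA g t M N f d V F G = d := by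
  intro F
  induction F with
  | nil => intro f d V G h; simp at h
  | cons c F' ih =>
    intro f d V G htgt hlen
    obtain ⟨f', rfl⟩ : ∃ k, f = k + 1 := ⟨f - 1, by simp at hlen; omega⟩
    by_cases hc : c = (M - 1, N - 1)
    · subst hc; simp [refA]
    · have htgt' : (M - 1, N - 1) ∈ F' := by
        rcases List.mem_cons.mp htgt with h | h
        · exact absurd h.symm hc
        · exact h
      simp only [refA, if_neg hc]
      exact ih f' d _ _ htgt' (by simp at hlen; omega)

theorem refA_level (g : List (List Int)) (t M N : Int) :
    ∀ (F : List (Int × Int)) (f : Nat) (d : Int) (V G : List (Int × Int)),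
      (M - 1, N - 1) ∉ F →
      refA g t M N (f + F.length) d V F G
        = refA g t M N f d (lvlF g t M N consV pairIns (V, G) F).1 []
            (lvlF g t M N consV pairIns (V, G) F).2 := by
  intro F
  induction F with
  | nil => intro f d V G _; simp [lvlF]
  | cons c F' ih =>
    intro f d V G htgt
    have hc : c ≠ (M - 1, N - 1) := fun h => htgt (h ▸ List.mem_cons_self)
    have : f + (c :: F').length = (f + F'.length) + 1 := by simp; omega
    rw [this]
    simp only [refA, if_neg hc]
    have hstep : lvlF g t M N consV pairIns (V, G) (c :: F')
        = lvlF g t M N consV pairIns (innerF g t M N consV pairIns (V, G) (nbrs c)) F' := by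
      simp only [lvlF, List.foldl_cons]
    rw [hstep]
    exact ih (f) d _ _ (fun h => htgt (List.mem_cons_of_mem _ h))

theorem refA_shift (g : List (List Int)) (t M N : Int) (f : Nat) (d : Int)
    (V : List (Int × Int)) (c : Int × Int) (G' : List (Int × Int)) :
    refA g t M N (f + 1) d V [] (c :: G') = refA g t M N (f + 1) (d + 1) V (c :: G') [] := by
  simp only [refA]

-- A = B on the common abstraction: per-pop reference at a level boundary equals per-level reference
theorem refA_to_levelRec (g : List (List Int)) (t M N : Int) (Mn Nn : Nat)
    (hM : M = (Mn : Int)) (hN : N = (Nn : Int)) :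
    ∀ u (V W F : List (Int × Int)) (d : Int) (f1 f2 : Nat), unvis Mn Nn V = u →
      (∀ x, x ∈ V ↔ x ∈ W) →
      F.length + unvis Mn Nn V + 2 ≤ f1 → unvis Mn Nn W + 2 ≤ f2 →
      refA g t M N f1 d V F [] = levelRec g t M N f2 d W F := by
  intro u
  induction u using Nat.strong_induction_on with
  | _ u ih =>
    intro V W F d f1 f2 hu hvw hf1 hf2
    have huw : unvis Mn Nn V = unvis Mn Nn W := unvis_congr Mn Nn V W hvw
    obtain ⟨f2', rfl⟩ : ∃ k, f2 = k + 1 := ⟨f2 - 1, by omega⟩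
    by_cases htgt : (M - 1, N - 1) ∈ F
    · rw [refA_target g t M N F f1 d V [] htgt (by omega)]
      simp [levelRec, htgt]
    · by_cases hnil : F = []
      · subst hnil
        obtain ⟨f1', rfl⟩ : ∃ k, f1 = k + 1 := ⟨f1 - 1, by omega⟩
        simp [refA, levelRec]
      · have hsplit : f1 = (f1 - F.length) + F.length := by omega
        rw [hsplit, refA_level g t M N F (f1 - F.length) d V [] htgt]
        simp only [levelRec, if_neg htgt, if_neg hnil]
        set st := lvlF g t M N consV pairIns (V, []) F with hst
        set stw := lvlF g t M N consV appA (W, []) F with hstw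
        have hmemV : ∀ x, x ∈ st.1 ↔ x ∈ stw.1 := by
          intro x
          rw [hst, hstw, lvlF_fst_mem g t M N consV pairIns insSpec_consV insSpec_pairIns,
            lvlF_fst_mem g t M N consV appA insSpec_consV insSpec_appA]
          constructor
          · rintro (hx | h)
            · exact Or.inl ((hvw x).mp hx)
            · exact Or.inr h
          · rintro (hx | h)
            · exact Or.inl ((hvw x).mpr hx)
            · exact Or.inr h
        have hmemG : ∀ x, x ∈ st.2 ↔ x ∈ stw.2 := by
          intro x
          rw [hst, hstw, lvlF_snd_mem g t M N consV pairIns insSpec_consV insSpec_pairIns,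
            lvlF_snd_mem g t M N consV appA insSpec_consV insSpec_appA]
          simp only [List.not_mem_nil, false_or]
          constructor
          · rintro ⟨ha, hok, hnv⟩
            exact ⟨ha, hok, fun hx => hnv ((hvw x).mpr hx)⟩
          · rintro ⟨ha, hok, hnv⟩
            exact ⟨ha, hok, fun hx => hnv ((hvw x).mp hx)⟩
        rcases hG : st.2 with _ | ⟨c, G₂⟩
        · have hGw : stw.2 = [] := by
            rw [List.eq_nil_iff_forall_not_mem]
            intro x hx
            have := (hmemG x).mpr hx
            rw [hG] at this
            simp at this
          rw [hGw]
          obtain ⟨k1, hk1⟩ : ∃ k, f1 - F.length = k + 1 := ⟨f1 - F.length - 1, by omega⟩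
          obtain ⟨k2, rfl⟩ : ∃ k, f2' = k + 1 := ⟨f2' - 1, by omega⟩
          rw [hk1]
          simp [refA, levelRec]
        · rw [← hG]
          have hcm : c ∈ st.2 := by rw [hG]; exact List.mem_cons_self
          have hlt : unvis Mn Nn st.1 < u := by
            rw [← hu, hst]
            exact lvl_unvis_lt g t M N Mn Nn hM hN consV pairIns insSpec_consV insSpec_pairIns
              V F c (hst ▸ hcm)
          have hmeas : st.2.length + unvis Mn Nn st.1 ≤ unvis Mn Nn V := by
            have := lvlF_measure g t M N Mn Nn hM hN consV pairIns insSpec_consV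
              lenSpec_pairIns F (V, [])
            simpa [hst] using this
          obtain ⟨k1, hk1⟩ : ∃ k, f1 - F.length = k + 1 := ⟨f1 - F.length - 1, by omega⟩
          rw [hk1, hG, refA_shift, ← hG]
          have hrec := ih (unvis Mn Nn st.1) hlt st.1 stw.1 st.2 (d + 1) (k1 + 1) f2'
            rfl hmemV (by omega) (by
              rw [← unvis_congr Mn Nn st.1 stw.1 hmemV]
              omega)
          rw [hrec]
          exact levelRec_congr g t M N f2' (d + 1) stw.1 stw.1 st.2 stw.2
            (fun x => Iff.rfl) hmemG

def mkE (dd : Int) (c : Int × Int) : Int × Int × Int := (dd, c.1, c.2)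

def ShapeV (Mn Nn : Nat) (vis : List (List Bool)) : Prop :=
  vis.length = Mn ∧ ∀ row ∈ vis, row.length = Nn

def RV (M N : Int) (vis : List (List Bool)) (V : List (Int × Int)) : Prop :=
  ∀ a b : Int, 0 ≤ a → a < M → 0 ≤ b → b < N → (get2 vis a b = true ↔ (a, b) ∈ V)

theorem getD_set_eq {α : Type} (l : List α) (i : Nat) (a d : α) (h : i < l.length) :
    (l.set i a).getD i d = a := by
  simp [List.getD_eq_getElem?_getD, List.getElem?_set_self, h]

theorem getD_set_ne {α : Type} (l : List α) (i j : Nat) (a : α) (d : α) (h : i ≠ j) :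
    (l.set i a).getD j d = l.getD j d := by
  simp [List.getD_eq_getElem?_getD, List.getElem?_set_ne h]

theorem getD_mem_of_lt {α : Type} (l : List α) (i : Nat) (d : α) (h : i < l.length) :
    l.getD i d ∈ l := by
  rw [List.getD_eq_getElem l d h]
  exact List.getElem_mem h

theorem shape_set2 (Mn Nn : Nat) (vis : List (List Bool)) (x y : Int)
    (h : ShapeV Mn Nn vis) (hx : x.toNat < Mn) :
    ShapeV Mn Nn (set2 vis x y) := by
  obtain ⟨h1, h2⟩ := h
  constructor
  · simp [set2, h1]
  · intro row hrow
    rcases List.mem_or_eq_of_mem_set hrow with hmem | rfl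
    · exact h2 row hmem
    · rw [List.length_set]
      exact h2 _ (getD_mem_of_lt vis x.toNat [] (by omega))

theorem get2_set2_eq (Mn Nn : Nat) (vis : List (List Bool)) (x y : Int)
    (h : ShapeV Mn Nn vis) (hx : x.toNat < Mn) (hy : y.toNat < Nn) :
    get2 (set2 vis x y) x y = true := by
  obtain ⟨h1, h2⟩ := h
  have hrow : (vis.getD x.toNat []).length = Nn :=
    h2 _ (getD_mem_of_lt vis x.toNat [] (by omega))
  unfold get2 set2
  rw [getD_set_eq vis x.toNat _ [] (by omega), getD_set_eq _ y.toNat _ _ (by omega)]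

theorem get2_set2_ne (vis : List (List Bool)) (x y a b : Int)
    (hx : 0 ≤ x) (hy : 0 ≤ y) (ha : 0 ≤ a) (hb : 0 ≤ b)
    (hne : (a, b) ≠ (x, y)) :
    get2 (set2 vis x y) a b = get2 vis a b := by
  by_cases hax : a = x
  · subst hax
    have hby : b.toNat ≠ y.toNat := by
      intro h
      exact hne (by rw [show b = y by omega])
    by_cases hlen : a.toNat < vis.length
    · unfold get2 set2
      rw [getD_set_eq vis a.toNat _ [] hlen, getD_set_ne _ y.toNat b.toNat _ _ (Ne.symm hby)]
    · unfold get2 set2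
      rw [List.set_eq_of_length_le (by omega)]
  · have hne' : a.toNat ≠ x.toNat := by omega
    unfold get2 set2
    rw [getD_set_ne vis x.toNat a.toNat _ [] (Ne.symm hne')]

theorem pqInsert_append (e : Int × Int × Int) (A B : List (Int × Int × Int))
    (h : ∀ a ∈ A, ¬ pqLe e a) : pqInsert e (A ++ B) = A ++ pqInsert e B := by
  induction A with
  | nil => simp
  | cons a A ih =>
    simp only [List.cons_append, pqInsert, if_neg (h a List.mem_cons_self)]
    rw [ih (fun a' ha' => h a' (List.mem_cons_of_mem _ ha'))]

theorem pqLe_level_false (dd : Int) (c f : Int × Int) : ¬ pqLe (mkE (dd + 1) c) (mkE dd f) := by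
  simp only [pqLe, mkE]
  rintro (h | ⟨h, _⟩) <;> omega

theorem pqInsert_map (dd : Int) (c : Int × Int) (G : List (Int × Int)) :
    pqInsert (mkE (dd + 1) c) (G.map (mkE (dd + 1))) = (pairIns c G).map (mkE (dd + 1)) := by
  induction G with
  | nil => simp [pqInsert, pairIns]
  | cons f G ih =>
    simp only [List.map_cons, pqInsert, pairIns]
    have hiff : pqLe (mkE (dd + 1) c) (mkE (dd + 1) f)
        ↔ (c.1 < f.1 ∨ (c.1 = f.1 ∧ c.2 ≤ f.2)) := by
      constructor
      · intro h
        rcases h with h | ⟨_, h⟩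
        · have h' : (dd + 1 : Int) < dd + 1 := h
          omega
        · exact h
      · intro h
        exact Or.inr ⟨rfl, h⟩
    by_cases h : c.1 < f.1 ∨ (c.1 = f.1 ∧ c.2 ≤ f.2)
    · rw [if_pos (hiff.mpr h), if_pos h]
      simp [mkE]
    · rw [if_neg (fun hh => h (hiff.mp hh)), if_neg h]
      simp only [List.map_cons]
      rw [ih]

-- one pass over the offsets list: A's queue/visited fold matches the abstract innerF
theorem foldA_corr (g : List (List Int)) (t M N : Int) (Mn Nn : Nat)
    (hM : M = (Mn : Int)) (hN : N = (Nn : Int)) (dd x y : Int) :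
    ∀ (offs : List (Int × Int)) (F' G V : List (Int × Int)) (vis : List (List Bool)),
      ShapeV Mn Nn vis → RV M N vis V →
      (offs.foldl (stepA g t M N dd x y) (F'.map (mkE dd) ++ G.map (mkE (dd + 1)), vis)).1
          = F'.map (mkE dd) ++
            ((innerF g t M N consV pairIns (V, G) (offs.map (fun o => (x + o.1, y + o.2)))).2).map (mkE (dd + 1)) ∧
        ShapeV Mn Nn (offs.foldl (stepA g t M N dd x y) (F'.map (mkE dd) ++ G.map (mkE (dd + 1)), vis)).2 ∧
        RV M N (offs.foldl (stepA g t M N dd x y) (F'.map (mkE dd) ++ G.map (mkE (dd + 1)), vis)).2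
          (innerF g t M N consV pairIns (V, G) (offs.map (fun o => (x + o.1, y + o.2)))).1 := by
  intro offs
  induction offs with
  | nil => intro F' G V vis hsh hrv; exact ⟨rfl, hsh, hrv⟩
  | cons o offs ih =>
    intro F' G V vis hsh hrv
    have hguardA : (0 ≤ x + o.1 ∧ x + o.1 < M ∧ 0 ≤ y + o.2 ∧ y + o.2 < N ∧
          get2 vis (x + o.1) (y + o.2) = false ∧ rowGet g (x + o.1) (y + o.2) ≥ t)
        ↔ (okc g t M N (x + o.1, y + o.2) ∧ (x + o.1, y + o.2) ∉ V) := by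
      constructor
      · rintro ⟨h1, h2, h3, h4, h5, h6⟩
        refine ⟨⟨h1, h2, h3, h4, h6⟩, ?_⟩
        intro hmem
        rw [(hrv _ _ h1 h2 h3 h4).mpr hmem] at h5
        simp at h5
      · rintro ⟨⟨h1, h2, h3, h4, h6⟩, hnv⟩
        refine ⟨h1, h2, h3, h4, ?_, h6⟩
        rw [← Bool.not_eq_true]
        intro hgg
        exact hnv ((hrv _ _ h1 h2 h3 h4).mp hgg)
    by_cases hg : okc g t M N (x + o.1, y + o.2) ∧ (x + o.1, y + o.2) ∉ V
    · have hstepA : stepA g t M N dd x y (F'.map (mkE dd) ++ G.map (mkE (dd + 1)), vis) o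
          = (F'.map (mkE dd) ++ (pairIns (x + o.1, y + o.2) G).map (mkE (dd + 1)),
             set2 vis (x + o.1) (y + o.2)) := by
        unfold stepA
        dsimp only
        rw [if_pos (hguardA.mpr hg)]
        rw [show ((dd + 1, x + o.1, y + o.2) : Int × Int × Int) = mkE (dd + 1) (x + o.1, y + o.2) from rfl]
        rw [pqInsert_append _ _ _ (fun a ha => by
          obtain ⟨c, _, rfl⟩ := List.mem_map.mp ha
          exact pqLe_level_false dd (x + o.1, y + o.2) c), pqInsert_map]
      have hshape' : ShapeV Mn Nn (set2 vis (x + o.1) (y + o.2)) := by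
        apply shape_set2 Mn Nn vis _ _ hsh
        obtain ⟨_, h2, _, _, _⟩ := hg.1
        simp only at h2
        omega
      have hrv' : RV M N (set2 vis (x + o.1) (y + o.2)) (consV (x + o.1, y + o.2) V) := by
        intro a b ha hb hc hd
        obtain ⟨hb1, hb2, hb3, hb4, _⟩ := hg.1
        simp only at hb1 hb2 hb3 hb4
        by_cases heq : (a, b) = (x + o.1, y + o.2)
        · have ha' : a = x + o.1 := congrArg Prod.fst heq
          have hb' : b = y + o.2 := congrArg Prod.snd heq
          subst ha'; subst hb'
          constructor
          · intro _; exact List.mem_cons_self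
          · intro _
            exact get2_set2_eq Mn Nn vis _ _ hsh (by omega) (by omega)
        · rw [get2_set2_ne vis _ _ a b hb1 hb3 ha hc heq, hrv a b ha hb hc hd]
          simp only [consV, List.mem_cons]
          constructor
          · exact Or.inr
          · rintro (hh | hh)
            · exact absurd hh heq
            · exact hh
      have hinner : innerF g t M N consV pairIns (V, G) ((o :: offs).map (fun o => (x + o.1, y + o.2)))
          = innerF g t M N consV pairIns
              (consV (x + o.1, y + o.2) V, pairIns (x + o.1, y + o.2) G)
              (offs.map (fun o => (x + o.1, y + o.2))) := by
        simp only [List.map_cons]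
        exact innerF_step_pos g t M N consV pairIns _ _ (V, G) hg
      rw [List.foldl_cons, hstepA, hinner]
      exact ih F' (pairIns (x + o.1, y + o.2) G) (consV (x + o.1, y + o.2) V)
        (set2 vis (x + o.1) (y + o.2)) hshape' hrv'
    · have hstepA : stepA g t M N dd x y (F'.map (mkE dd) ++ G.map (mkE (dd + 1)), vis)
          o = (F'.map (mkE dd) ++ G.map (mkE (dd + 1)), vis) := by
        unfold stepA
        dsimp only
        rw [if_neg (fun hh => hg (hguardA.mp hh))]
      have hinner : innerF g t M N consV pairIns (V, G) ((o :: offs).map (fun o => (x + o.1, y + o.2)))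
          = innerF g t M N consV pairIns (V, G) (offs.map (fun o => (x + o.1, y + o.2))) := by
        simp only [List.map_cons]
        exact innerF_step_neg g t M N consV pairIns _ _ (V, G) hg
      rw [List.foldl_cons, hstepA, hinner]
      exact ih F' G V vis hsh hrv

-- A's whole loop equals the per-pop reference
theorem loopA_corr (g : List (List Int)) (t M N : Int) (Mn Nn : Nat)
    (hM : M = (Mn : Int)) (hN : N = (Nn : Int)) :
    ∀ (fuel : Nat) (d : Int) (F G V : List (Int × Int)) (vis : List (List Bool)),
      ShapeV Mn Nn vis → RV M N vis V →
      bfsLoopA g t M N fuel (F.map (mkE d) ++ G.map (mkE (d + 1))) vis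
        = refA g t M N fuel d V F G := by
  intro fuel
  induction fuel with
  | zero => intro d F G V vis _ _; rfl
  | succ fuel ih =>
    intro d F G V vis hsh hrv
    rcases F with _ | ⟨c, F'⟩
    · rcases G with _ | ⟨c, G'⟩
      · rfl
      · have hq : ([] : List (Int × Int)).map (mkE d) ++ (c :: G').map (mkE (d + 1))
            = (d + 1, c.1, c.2) :: (G'.map (mkE (d + 1)) ++ ([] : List (Int × Int)).map (mkE (d + 1 + 1))) := by
          simp [mkE]
        rw [hq]
        show (if c.1 = M - 1 ∧ c.2 = N - 1 then d + 1
          else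
            bfsLoopA g t M N fuel
              (offsets.foldl (stepA g t M N (d + 1) c.1 c.2)
                (G'.map (mkE (d + 1)) ++ ([] : List (Int × Int)).map (mkE (d + 1 + 1)), vis)).1
              (offsets.foldl (stepA g t M N (d + 1) c.1 c.2)
                (G'.map (mkE (d + 1)) ++ ([] : List (Int × Int)).map (mkE (d + 1 + 1)), vis)).2) = _
        by_cases hc : c = (M - 1, N - 1)
        · rw [if_pos (by rw [hc]; exact ⟨rfl, rfl⟩)]
          simp [refA, hc]
        · rw [if_neg (fun h => hc (Prod.ext h.1 h.2))]
          obtain ⟨h1, h2, h3⟩ := foldA_corr g t M N Mn Nn hM hN (d + 1) c.1 c.2 offsets G' [] V vis hsh hrv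
          rw [h1]
          simp only [refA, if_neg hc]
          exact ih (d + 1) G' (innerF g t M N consV pairIns (V, []) (nbrs c)).2
            (innerF g t M N consV pairIns (V, []) (nbrs c)).1 _ h2 h3
    · have hq : (c :: F').map (mkE d) ++ G.map (mkE (d + 1))
          = (d, c.1, c.2) :: (F'.map (mkE d) ++ G.map (mkE (d + 1))) := by simp [mkE]
      rw [hq]
      show (if c.1 = M - 1 ∧ c.2 = N - 1 then d
        else
          bfsLoopA g t M N fuel
            (offsets.foldl (stepA g t M N d c.1 c.2) (F'.map (mkE d) ++ G.map (mkE (d + 1)), vis)).1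
            (offsets.foldl (stepA g t M N d c.1 c.2) (F'.map (mkE d) ++ G.map (mkE (d + 1)), vis)).2) = _
      by_cases hc : c = (M - 1, N - 1)
      · rw [if_pos (by rw [hc]; exact ⟨rfl, rfl⟩)]
        simp [refA, hc]
      · rw [if_neg (fun h => hc (Prod.ext h.1 h.2))]
        obtain ⟨h1, h2, h3⟩ := foldA_corr g t M N Mn Nn hM hN d c.1 c.2 offsets F' G V vis hsh hrv
        rw [h1]
        simp only [refA, if_neg hc]
        exact ih d F' (innerF g t M N consV pairIns (V, G) (nbrs c)).2
          (innerF g t M N consV pairIns (V, G) (nbrs c)).1 _ h2 h3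

-- pre-marking the start cell (0,0) as visited does not change the result
theorem levelRec_start (g : List (List Int)) (t M N : Int) (Mn Nn : Nat)
    (hM : M = (Mn : Int)) (hN : N = (Nn : Int)) (hts : ((M - 1, N - 1) : Int × Int) ≠ (0, 0)) :
    ∀ u (V V' F F' : List (Int × Int)) (d : Int) (f f' : Nat), unvis Mn Nn V = u →
      (∀ x, x ∈ V' ↔ x ∈ V ∨ x = ((0 : Int), (0 : Int))) →
      (∀ x : Int × Int, x ≠ (0, 0) → (x ∈ F ↔ x ∈ F')) →
      (((0 : Int), (0 : Int)) ∈ F' → ((0 : Int), (0 : Int)) ∈ F) →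
      (((0 : Int), (0 : Int)) ∉ F' → ∀ n ∈ nbrs ((0 : Int), (0 : Int)), okc g t M N n → n ∈ V) →
      unvis Mn Nn V + 2 ≤ f → unvis Mn Nn V + 2 ≤ f' →
      levelRec g t M N f d V F = levelRec g t M N f' d V' F' := by
  intro u
  induction u using Nat.strong_induction_on with
  | _ u ih =>
    intro V V' F F' d f f' hu hv hf hsf hc hfl hfl'
    obtain ⟨k, rfl⟩ : ∃ k, f = k + 1 := ⟨f - 1, by omega⟩
    obtain ⟨k', rfl⟩ : ∃ k, f' = k + 1 := ⟨f' - 1, by omega⟩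
    have hFF' : ∀ x, x ∈ F' → x ∈ F := by
      intro x hx
      by_cases hxs : x = ((0 : Int), (0 : Int))
      · exact hxs ▸ hsf (hxs ▸ hx)
      · exact (hf x hxs).mpr hx
    simp only [levelRec]
    by_cases h1 : (M - 1, N - 1) ∈ F
    · rw [if_pos h1, if_pos ((hf _ hts).mp h1)]
    · rw [if_neg h1, if_neg (fun h => h1 ((hf _ hts).mpr h))]
      by_cases h2 : F' = []
      · subst h2
        by_cases h3 : F = []
        · rw [if_pos h3, if_pos rfl]
        · rw [if_neg h3]
          have hFs : ∀ x ∈ F, x = ((0 : Int), (0 : Int)) := by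
            intro x hx
            by_contra hxs
            exact (List.not_mem_nil (a := x)) ((hf x hxs).mp hx)
          have hcV := hc (List.not_mem_nil)
          have hempty : (lvlF g t M N consV appA (V, []) F).2 = [] := by
            rw [List.eq_nil_iff_forall_not_mem]
            intro x hx
            rw [lvlF_snd_mem g t M N consV appA insSpec_consV insSpec_appA] at hx
            rcases hx with hx | ⟨⟨c, hcF, hn⟩, hok, hnv⟩
            · simp at hx
            · exact hnv (hcV x (hFs c hcF ▸ hn) hok)
          rw [hempty]
          obtain ⟨k1, rfl⟩ : ∃ j, k = j + 1 := ⟨k - 1, by omega⟩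
          simp [levelRec]
      · have h3 : F ≠ [] := by
          rcases List.exists_mem_of_ne_nil F' h2 with ⟨y, hy⟩
          exact List.ne_nil_of_mem (hFF' y hy)
        rw [if_neg h3, if_neg h2]
        set st := lvlF g t M N consV appA (V, []) F with hst
        set st' := lvlF g t M N consV appA (V', []) F' with hst'
        have hmemV : ∀ x, x ∈ st.1 ↔ x ∈ V ∨ ((∃ c ∈ F, x ∈ nbrs c) ∧ okc g t M N x) := by
          intro x
          rw [hst, lvlF_fst_mem g t M N consV appA insSpec_consV insSpec_appA]
        have hmemV' : ∀ x, x ∈ st'.1 ↔ x ∈ V' ∨ ((∃ c ∈ F', x ∈ nbrs c) ∧ okc g t M N x) := by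
          intro x
          rw [hst', lvlF_fst_mem g t M N consV appA insSpec_consV insSpec_appA]
        have hmemN : ∀ x, x ∈ st.2 ↔ ((∃ c ∈ F, x ∈ nbrs c) ∧ okc g t M N x ∧ x ∉ V) := by
          intro x
          rw [hst, lvlF_snd_mem g t M N consV appA insSpec_consV insSpec_appA]
          simp only [List.not_mem_nil, false_or]
        have hmemN' : ∀ x, x ∈ st'.2 ↔ ((∃ c ∈ F', x ∈ nbrs c) ∧ okc g t M N x ∧ x ∉ V') := by
          intro x
          rw [hst', lvlF_snd_mem g t M N consV appA insSpec_consV insSpec_appA]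
          simp only [List.not_mem_nil, false_or]
        have hadj : ∀ x, okc g t M N x → x ∉ V → ((∃ c ∈ F, x ∈ nbrs c) ↔ (∃ c ∈ F', x ∈ nbrs c)) := by
          intro x hok hnv
          constructor
          · rintro ⟨c, hcF, hn⟩
            by_cases hcs : c = ((0 : Int), (0 : Int))
            · by_cases hsF' : ((0 : Int), (0 : Int)) ∈ F'
              · exact ⟨c, hcs ▸ hsF', hn⟩
              · exact absurd (hc hsF' x (hcs ▸ hn) hok) hnv
            · exact ⟨c, (hf c hcs).mp hcF, hn⟩
          · rintro ⟨c, hcF', hn⟩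
            exact ⟨c, hFF' c hcF', hn⟩
        have hsV' : ((0 : Int), (0 : Int)) ∈ V' := (hv _).mpr (Or.inr rfl)
        have hv2 : ∀ x, x ∈ st'.1 ↔ x ∈ st.1 ∨ x = ((0 : Int), (0 : Int)) := by
          intro x
          rw [hmemV' x, hmemV x, hv x]
          constructor
          · rintro ((hx | rfl) | ⟨ha, hok⟩)
            · exact Or.inl (Or.inl hx)
            · exact Or.inr rfl
            · exact Or.inl (Or.inr ⟨⟨ha.choose, hFF' _ ha.choose_spec.1, ha.choose_spec.2⟩, hok⟩)
          · rintro ((hx | ⟨ha, hok⟩) | rfl)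
            · exact Or.inl (Or.inl hx)
            · by_cases hxv : x ∈ V
              · exact Or.inl (Or.inl hxv)
              · exact Or.inr ⟨(hadj x hok hxv).mp ha, hok⟩
            · exact Or.inl (Or.inr rfl)
        have hf2 : ∀ x : Int × Int, x ≠ (0, 0) → (x ∈ st.2 ↔ x ∈ st'.2) := by
          intro x hxs
          rw [hmemN x, hmemN' x]
          constructor
          · rintro ⟨ha, hok, hnv⟩
            refine ⟨(hadj x hok hnv).mp ha, hok, fun hx => ?_⟩
            rcases (hv x).mp hx with hx' | hx'
            · exact hnv hx'
            · exact hxs hx'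
          · rintro ⟨ha, hok, hnv⟩
            have hnvV : x ∉ V := fun hx => hnv ((hv x).mpr (Or.inl hx))
            exact ⟨(hadj x hok hnvV).mpr ha, hok, hnvV⟩
        have hsf2 : ((0 : Int), (0 : Int)) ∈ st'.2 → ((0 : Int), (0 : Int)) ∈ st.2 := by
          intro hx
          exact absurd hsV' ((hmemN' _).mp hx).2.2
        have hc2 : ((0 : Int), (0 : Int)) ∉ st'.2 →
            ∀ n ∈ nbrs ((0 : Int), (0 : Int)), okc g t M N n → n ∈ st.1 := by
          intro _ n hn hok
          by_cases hsF : ((0 : Int), (0 : Int)) ∈ F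
          · exact (hmemV n).mpr (Or.inr ⟨⟨_, hsF, hn⟩, hok⟩)
          · have hsF' : ((0 : Int), (0 : Int)) ∉ F' := fun h => hsF (hsf h)
            exact (hmemV n).mpr (Or.inl (hc hsF' n hn hok))
        rcases hN2 : st.2 with _ | ⟨c, G⟩
        · have hN2' : st'.2 = [] := by
            rw [List.eq_nil_iff_forall_not_mem]
            intro x hx
            by_cases hxs : x = ((0 : Int), (0 : Int))
            · exact absurd hsV' ((hmemN' _).mp (hxs ▸ hx)).2.2
            · have := (hf2 x hxs).mpr hx
              rw [hN2] at this
              simp at this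
          rw [hN2']
          obtain ⟨k1, rfl⟩ : ∃ j, k = j + 1 := ⟨k - 1, by omega⟩
          obtain ⟨k2, rfl⟩ : ∃ j, k' = j + 1 := ⟨k' - 1, by omega⟩
          simp [levelRec]
        · have hlt : unvis Mn Nn st.1 < u := by
            rw [← hu, hst]
            exact lvl_unvis_lt g t M N Mn Nn hM hN consV appA insSpec_consV insSpec_appA
              V F c (by rw [← hst, hN2]; exact List.mem_cons_self)
          rw [← hN2]
          exact ih (unvis Mn Nn st.1) hlt st.1 st'.1 st.2 st'.2 (d + 1) k k'
            rfl hv2 hf2 hsf2 hc2 (by omega) (by omega)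

theorem get2_replicate (Mn Nn : Nat) (a b : Int) :
    get2 (List.replicate Mn (List.replicate Nn false)) a b = false := by
  unfold get2
  rcases Nat.lt_or_ge a.toNat Mn with ha | ha
  · rcases Nat.lt_or_ge b.toNat Nn with hb | hb <;>
      simp [List.getD_eq_getElem?_getD, List.getElem?_replicate, ha, hb, Nat.not_lt.mpr]
  · simp [List.getD_eq_getElem?_getD, List.getElem?_replicate, Nat.not_lt.mpr ha]

theorem unvis_nil (Mn Nn : Nat) : unvis Mn Nn [] = Mn * Nn := by
  unfold unvis
  rw [List.filter_eq_self.mpr (by intro x _; simp), univ_length]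

-- ===================================================================
-- ============ NEW B-SIDE: reachability and the DP model ============
-- ===================================================================

-- reachable from (0,0) within k steps through threshold-passing cells
def Rch (g : List (List Int)) (t M N : Int) : Nat → (Int × Int) → Prop
  | 0, c => c = (0, 0)
  | k + 1, c => Rch g t M N k c ∨ (okc g t M N c ∧ ∃ n ∈ nbrs c, Rch g t M N k n)

-- mathematical model of one dp cell value after k sweeps
def fD (g : List (List Int)) (t M N I : Int) : Nat → (Int × Int) → Int
  | 0, c => if c = (0, 0) then 0 else I
  | k + 1, c =>
    if ¬(c.1 = 0 ∧ c.2 = 0) ∧ rowGet g c.1 c.2 ≥ t then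
      (nbrs c).foldl
        (fun d n =>
          if 0 ≤ n.1 ∧ n.1 < M ∧ 0 ≤ n.2 ∧ n.2 < N ∧ fD g t M N I k n + 1 < d then
            fD g t M N I k n + 1
          else d)
        (fD g t M N I k c)
    else fD g t M N I k c

-- the value B finally returns, in terms of the model
def bOut (g : List (List Int)) (t M N I : Int) (K : Nat) : Int :=
  if fD g t M N I K (M - 1, N - 1) < I then fD g t M N I K (M - 1, N - 1) else 0

-- in-bounds predicate
abbrev inbP (M N : Int) (c : Int × Int) : Prop :=
  0 ≤ c.1 ∧ c.1 < M ∧ 0 ≤ c.2 ∧ c.2 < N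

-- generic min-relaxation fold (the shape shared by dpRelax and fD's step)
def relaxF (M N : Int) (v : Int × Int → Int) (L : List (Int × Int)) (init : Int) : Int :=
  L.foldl
    (fun d n => if 0 ≤ n.1 ∧ n.1 < M ∧ 0 ≤ n.2 ∧ n.2 < N ∧ v n + 1 < d then v n + 1 else d)
    init

theorem mem_nbrs_iff (x c : Int × Int) :
    x ∈ nbrs c ↔ x = (c.1 - 1, c.2) ∨ x = (c.1 + 1, c.2) ∨ x = (c.1, c.2 - 1) ∨ x = (c.1, c.2 + 1) := by
  simp only [nbrs, offsets, List.map_cons, List.map_nil, List.mem_cons, List.not_mem_nil, or_false,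
    Prod.ext_iff]
  omega

theorem nbrs_symm (x c : Int × Int) : x ∈ nbrs c ↔ c ∈ nbrs x := by
  rw [mem_nbrs_iff, mem_nbrs_iff]
  simp only [Prod.ext_iff]
  omega

theorem Rch_mono (g : List (List Int)) (t M N : Int) (j k : Nat) (c : Int × Int)
    (hjk : j ≤ k) (h : Rch g t M N j c) : Rch g t M N k c := by
  induction k with
  | zero => exact (Nat.le_zero.mp hjk) ▸ h
  | succ k ih =>
    rcases Nat.lt_or_ge j (k + 1) with hk | hk
    · exact Or.inl (ih (by omega))
    · exact (by omega : j = k + 1) ▸ h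

theorem Rch_start (g : List (List Int)) (t M N : Int) (k : Nat) :
    Rch g t M N k ((0 : Int), (0 : Int)) := by
  induction k with
  | zero => rfl
  | succ k ih => exact Or.inl ih

theorem Rch_inb (g : List (List Int)) (t M N : Int) (hM1 : 1 ≤ M) (hN1 : 1 ≤ N)
    (k : Nat) (c : Int × Int) (h : Rch g t M N k c) : inbP M N c := by
  induction k with
  | zero => rw [h]; exact ⟨le_refl 0, by omega, le_refl 0, by omega⟩
  | succ k ih =>
    rcases h with h | ⟨hok, _⟩
    · exact ih h
    · exact ⟨hok.1, hok.2.1, hok.2.2.1, hok.2.2.2.1⟩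

-- if one level adds nothing, nothing is ever added
theorem Rch_stable (g : List (List Int)) (t M N : Int) (e : Nat)
    (hst : ∀ c, Rch g t M N (e + 1) c → Rch g t M N e c) :
    ∀ j c, Rch g t M N j c → Rch g t M N e c := by
  have key : ∀ m c, Rch g t M N (e + m) c → Rch g t M N e c := by
    intro m
    induction m with
    | zero => exact fun c h => h
    | succ m ih =>
      intro c h
      rcases h with h | ⟨hok, n, hn, hR⟩
      · exact ih c h
      · exact hst c (Or.inr ⟨hok, n, hn, ih n hR⟩)
  intro j c h
  rcases Nat.le_total j e with hj | hj
  · exact Rch_mono g t M N j e c hj h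
  · refine key (j - e) c ?_
    have hje : e + (j - e) = j := by omega
    rwa [hje]

theorem relaxF_le_init (M N : Int) (v : Int × Int → Int) (L : List (Int × Int)) (init : Int) :
    relaxF M N v L init ≤ init := by
  induction L generalizing init with
  | nil => exact le_refl _
  | cons n L ih =>
    simp only [relaxF, List.foldl_cons]
    split
    · exact le_trans (ih _) (by omega)
    · exact ih init

theorem relaxF_le_elem (M N : Int) (v : Int × Int → Int) (L : List (Int × Int)) (init : Int)
    (n : Int × Int) (hn : n ∈ L) (hb : inbP M N n) : relaxF M N v L init ≤ v n + 1 := by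
  induction L generalizing init with
  | nil => simp at hn
  | cons m L ih =>
    simp only [relaxF, List.foldl_cons]
    rcases List.mem_cons.mp hn with rfl | hn'
    · by_cases h : 0 ≤ n.1 ∧ n.1 < M ∧ 0 ≤ n.2 ∧ n.2 < N ∧ v n + 1 < init
      · rw [if_pos h]
        exact relaxF_le_init M N v L _
      · rw [if_neg h]
        have hni : ¬ (v n + 1 < init) := by
          obtain ⟨h1, h2, h3, h4⟩ := hb
          intro hlt; exact h ⟨h1, h2, h3, h4, hlt⟩
        exact le_trans (relaxF_le_init M N v L init) (by omega)
    · split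
      · exact ih _ hn'
      · exact ih init hn'

theorem relaxF_cases (M N : Int) (v : Int × Int → Int) (L : List (Int × Int)) (init : Int) :
    relaxF M N v L init = init ∨
      ∃ n ∈ L, inbP M N n ∧ relaxF M N v L init = v n + 1 := by
  induction L generalizing init with
  | nil => exact Or.inl rfl
  | cons n L ih =>
    simp only [relaxF, List.foldl_cons]
    by_cases h : 0 ≤ n.1 ∧ n.1 < M ∧ 0 ≤ n.2 ∧ n.2 < N ∧ v n + 1 < init
    · rw [if_pos h]
      rcases ih (v n + 1) with h' | ⟨m, hm, hb, h'⟩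
      · exact Or.inr ⟨n, List.mem_cons_self, ⟨h.1, h.2.1, h.2.2.1, h.2.2.2.1⟩, h'⟩
      · exact Or.inr ⟨m, List.mem_cons_of_mem _ hm, hb, h'⟩
    · rw [if_neg h]
      rcases ih init with h' | ⟨m, hm, hb, h'⟩
      · exact Or.inl h'
      · exact Or.inr ⟨m, List.mem_cons_of_mem _ hm, hb, h'⟩

theorem relaxF_congr (M N : Int) (v w : Int × Int → Int) (L : List (Int × Int)) (i1 i2 : Int)
    (hv : ∀ n ∈ L, inbP M N n → v n = w n) (hi : i1 = i2) :
    relaxF M N v L i1 = relaxF M N w L i2 := by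
  induction L generalizing i1 i2 with
  | nil => exact hi
  | cons n L ih =>
    simp only [relaxF, List.foldl_cons]
    have hvn : ∀ (h : inbP M N n), v n = w n := fun h => hv n List.mem_cons_self h
    by_cases hb : inbP M N n
    · rw [hvn hb, hi]
      exact ih _ _ (fun m hm h => hv m (List.mem_cons_of_mem _ hm) h) rfl
    · have c1 : ¬ (0 ≤ n.1 ∧ n.1 < M ∧ 0 ≤ n.2 ∧ n.2 < N ∧ v n + 1 < i1) := by
        intro h; exact hb ⟨h.1, h.2.1, h.2.2.1, h.2.2.2.1⟩
      have c2 : ¬ (0 ≤ n.1 ∧ n.1 < M ∧ 0 ≤ n.2 ∧ n.2 < N ∧ w n + 1 < i2) := by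
        intro h; exact hb ⟨h.1, h.2.1, h.2.2.1, h.2.2.2.1⟩
      rw [if_neg c1, if_neg c2]
      exact ih _ _ (fun m hm h => hv m (List.mem_cons_of_mem _ hm) h) hi

-- fD's step written through relaxF
theorem fD_succ (g : List (List Int)) (t M N I : Int) (k : Nat) (c : Int × Int) :
    fD g t M N I (k + 1) c =
      if ¬(c.1 = 0 ∧ c.2 = 0) ∧ rowGet g c.1 c.2 ≥ t then
        relaxF M N (fD g t M N I k) (nbrs c) (fD g t M N I k c)
      else fD g t M N I k c := rfl

theorem fD_zero (g : List (List Int)) (t M N I : Int) (c : Int × Int) :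
    fD g t M N I 0 c = if c = (0, 0) then 0 else I := rfl

theorem fD_start (g : List (List Int)) (t M N I : Int) (k : Nat) :
    fD g t M N I k ((0 : Int), (0 : Int)) = 0 := by
  induction k with
  | zero => rfl
  | succ k ih =>
    rw [fD_succ]
    rw [if_neg (by simp)]
    exact ih

theorem fD_le_I (g : List (List Int)) (t M N I : Int) (hI : 0 ≤ I) (k : Nat) (c : Int × Int) :
    fD g t M N I k c ≤ I := by
  induction k generalizing c with
  | zero =>
    rw [fD_zero]
    split
    · exact hI
    · exact le_refl I
  | succ k ih =>
    rw [fD_succ]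
    split
    · exact le_trans (relaxF_le_init M N _ _ _) (ih c)
    · exact ih c

-- completeness: a cell reachable in j steps has table value ≤ j after j sweeps
theorem fD_complete (g : List (List Int)) (t M N I : Int) (hM1 : 1 ≤ M) (hN1 : 1 ≤ N) :
    ∀ (j k : Nat) (c : Int × Int), j ≤ k → Rch g t M N j c →
      fD g t M N I k c ≤ (j : Int) := by
  intro j
  induction j with
  | zero =>
    intro k c _ hR
    rw [hR, fD_start]
    simp
  | succ j ih =>
    intro k c hjk hR
    rcases hR with hR | ⟨hok, n, hn, hRn⟩
    · calc fD g t M N I k c ≤ (j : Int) := ih k c (by omega) hR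
        _ ≤ ((j + 1 : Nat) : Int) := by push_cast; omega
    · by_cases hc : c = ((0 : Int), (0 : Int))
      · rw [hc, fD_start]
        positivity
      · obtain ⟨k', rfl⟩ : ∃ k', k = k' + 1 := ⟨k - 1, by omega⟩
        rw [fD_succ, if_pos ⟨by
            intro hh
            exact hc (Prod.ext hh.1 hh.2), hok.2.2.2.2⟩]
        have hnb : inbP M N n := Rch_inb g t M N hM1 hN1 j n hRn
        have h1 : relaxF M N (fD g t M N I k') (nbrs c) (fD g t M N I k' c)
            ≤ fD g t M N I k' n + 1 := relaxF_le_elem M N _ _ _ n hn hnb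
        have h2 : fD g t M N I k' n ≤ (j : Int) := ih k' n (by omega) hRn
        push_cast
        omega

-- soundness: a finite table entry certifies reachability in that many steps
theorem fD_sound (g : List (List Int)) (t M N I : Int) (hI : 0 ≤ I) :
    ∀ (k : Nat) (c : Int × Int), inbP M N c →
      fD g t M N I k c = I ∨
        ∃ j : Nat, j ≤ k ∧ fD g t M N I k c = (j : Int) ∧ Rch g t M N j c := by
  intro k
  induction k with
  | zero =>
    intro c _
    rw [fD_zero]
    by_cases hc : c = ((0 : Int), (0 : Int))
    · rw [if_pos hc]
      exact Or.inr ⟨0, le_refl 0, by simp, hc⟩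
    · rw [if_neg hc]
      exact Or.inl rfl
  | succ k ih =>
    intro c hc
    rw [fD_succ]
    by_cases hg : ¬(c.1 = 0 ∧ c.2 = 0) ∧ rowGet g c.1 c.2 ≥ t
    · rw [if_pos hg]
      rcases relaxF_cases M N (fD g t M N I k) (nbrs c) (fD g t M N I k c) with he | ⟨n, hn, hnb, he⟩
      · rw [he]
        rcases ih c hc with h | ⟨j, hj, hv, hR⟩
        · exact Or.inl h
        · exact Or.inr ⟨j, by omega, hv, hR⟩
      · rw [he]
        have hle : relaxF M N (fD g t M N I k) (nbrs c) (fD g t M N I k c) ≤ I :=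
          le_trans (relaxF_le_init M N _ _ _) (fD_le_I g t M N I hI k c)
        have hnI : fD g t M N I k n ≠ I := by
          intro hh
          rw [hh] at he
          omega
        rcases ih n hnb with h | ⟨j, hj, hv, hR⟩
        · exact absurd h hnI
        · refine Or.inr ⟨j + 1, by omega, by rw [hv]; push_cast; ring, ?_⟩
          have hokc : okc g t M N c := ⟨hc.1, hc.2.1, hc.2.2.1, hc.2.2.2, hg.2⟩
          exact Or.inr ⟨hokc, n, hn, hR⟩
    · rw [if_neg hg]
      rcases ih c hc with h | ⟨j, hj, hv, hR⟩
      · exact Or.inl h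
      · exact Or.inr ⟨j, by omega, hv, hR⟩

-- pointwise congruence of the dp step on in-bounds cells
theorem fD_step_congr (g : List (List Int)) (t M N I : Int) (a b : Nat)
    (h : ∀ c, inbP M N c → fD g t M N I a c = fD g t M N I b c) :
    ∀ c, inbP M N c → fD g t M N I (a + 1) c = fD g t M N I (b + 1) c := by
  intro c hc
  rw [fD_succ, fD_succ]
  split
  · exact relaxF_congr M N _ _ _ _ _ (fun n _ hn => h n hn) (h c hc)
  · exact h c hc

theorem fD_stable_forever (g : List (List Int)) (t M N I : Int) (k : Nat)
    (hst : ∀ c, inbP M N c → fD g t M N I (k + 1) c = fD g t M N I k c) :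
    ∀ (m : Nat) (c : Int × Int), inbP M N c → fD g t M N I (k + m) c = fD g t M N I k c := by
  intro m
  induction m with
  | zero => exact fun c _ => rfl
  | succ m ih =>
    intro c hc
    have : fD g t M N I (k + m + 1) c = fD g t M N I (k + 1) c :=
      fD_step_congr g t M N I (k + m) k ih c hc
    rw [show k + (m + 1) = k + m + 1 from rfl, this, hst c hc]

-- unreachability of the target forces bOut = 0
theorem unreach_bOut (g : List (List Int)) (t M N I : Int) (hI : 0 ≤ I) (K : Nat) (e : Nat)
    (hMN : inbP M N (M - 1, N - 1))
    (hst : ∀ c, Rch g t M N (e + 1) c → Rch g t M N e c)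
    (htgt : ¬ Rch g t M N e (M - 1, N - 1)) :
    bOut g t M N I K = 0 := by
  have hall : ∀ j, ¬ Rch g t M N j (M - 1, N - 1) := by
    intro j hR
    exact htgt (Rch_stable g t M N e hst j _ hR)
  unfold bOut
  rcases fD_sound g t M N I hI K (M - 1, N - 1) hMN with h | ⟨j, _, _, hR⟩
  · rw [h, if_neg (by omega)]
  · exact absurd hR (hall j)

-- BFS frontier expansion matches one step of Rch
theorem Rch_expand (g : List (List Int)) (t M N : Int) (d : Nat)
    (V F : List (Int × Int))
    (hV : ∀ x, x ∈ V ↔ Rch g t M N d x)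
    (hF : ∀ x, x ∈ F ↔ Rch g t M N d x ∧ ∀ j < d, ¬ Rch g t M N j x) :
    (∀ x, (x ∈ V ∨ ((∃ c ∈ F, x ∈ nbrs c) ∧ okc g t M N x)) ↔ Rch g t M N (d + 1) x) ∧
    (∀ x, ((∃ c ∈ F, x ∈ nbrs c) ∧ okc g t M N x ∧ x ∉ V) ↔
      (Rch g t M N (d + 1) x ∧ ∀ j < d + 1, ¬ Rch g t M N j x)) := by
  have fst : ∀ x, (x ∈ V ∨ ((∃ c ∈ F, x ∈ nbrs c) ∧ okc g t M N x)) ↔ Rch g t M N (d + 1) x := by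
    intro x
    constructor
    · rintro (hx | ⟨⟨c, hcF, hn⟩, hok⟩)
      · exact Or.inl ((hV x).mp hx)
      · exact Or.inr ⟨hok, c, (nbrs_symm c x).mpr hn, ((hF c).mp hcF).1⟩
    · rintro (hx | ⟨hok, n, hn, hRn⟩)
      · exact Or.inl ((hV x).mpr hx)
      · rcases d with _ | e
        · have hns : n = ((0 : Int), (0 : Int)) := hRn
          refine Or.inr ⟨⟨n, (hF n).mpr ⟨hRn, by omega⟩, (nbrs_symm x n).mpr hn⟩, hok⟩
        · by_cases hRe : Rch g t M N e n
          · exact Or.inl ((hV x).mpr (Or.inr ⟨hok, n, hn, hRe⟩))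
          · have hnF : n ∈ F := (hF n).mpr ⟨hRn, by
              intro j hj hRj
              exact hRe (Rch_mono g t M N j e n (by omega) hRj)⟩
            exact Or.inr ⟨⟨n, hnF, (nbrs_symm x n).mpr hn⟩, hok⟩
  refine ⟨fst, fun x => ?_⟩
  constructor
  · rintro ⟨ha, hok, hnv⟩
    refine ⟨(fst x).mp (Or.inr ⟨ha, hok⟩), ?_⟩
    intro j hj hRj
    exact hnv ((hV x).mpr (Rch_mono g t M N j d x (by omega) hRj))
  · rintro ⟨hR, hmin⟩
    have hnd : ¬ Rch g t M N d x := hmin d (by omega)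
    have hnv : x ∉ V := fun hx => hnd ((hV x).mp hx)
    rcases (fst x).mpr hR with hx | ⟨ha, hok⟩
    · exact absurd hx hnv
    · exact ⟨ha, hok, hnv⟩

-- the per-level reference computes exactly B's answer
theorem levelRec_dist (g : List (List Int)) (t M N I : Int) (Mn Nn K : Nat)
    (hM : M = (Mn : Int)) (hN : N = (Nn : Int)) (hK : K = Mn * Nn) (hI : I = (K : Int))
    (hM1 : 1 ≤ Mn) (hN1 : 1 ≤ Nn) :
    ∀ u (V F : List (Int × Int)) (d : Nat) (f : Nat), unvis Mn Nn V = u →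
      (∀ x, x ∈ V ↔ Rch g t M N d x) →
      (∀ x, x ∈ F ↔ Rch g t M N d x ∧ ∀ j < d, ¬ Rch g t M N j x) →
      (∀ j < d, ¬ Rch g t M N j (M - 1, N - 1)) →
      d + unvis Mn Nn V + 1 ≤ K →
      unvis Mn Nn V + 2 ≤ f →
      levelRec g t M N f (d : Int) V F = bOut g t M N I K := by
  have hM1' : (1 : Int) ≤ M := by rw [hM]; exact_mod_cast hM1
  have hN1' : (1 : Int) ≤ N := by rw [hN]; exact_mod_cast hN1
  have hMNt : inbP M N (M - 1, N - 1) := ⟨by omega, by omega, by omega, by omega⟩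
  have hI0 : 0 ≤ I := by rw [hI]; positivity
  intro u
  induction u using Nat.strong_induction_on with
  | _ u ih =>
    intro V F d f hu hV hF htgt hmeas hfuel
    obtain ⟨f', rfl⟩ : ∃ k, f = k + 1 := ⟨f - 1, by omega⟩
    simp only [levelRec]
    by_cases h1 : (M - 1, N - 1) ∈ F
    · rw [if_pos h1]
      have hRt : Rch g t M N d (M - 1, N - 1) := ((hF _).mp h1).1
      have hdK : d ≤ K := by omega
      have hle : fD g t M N I K (M - 1, N - 1) ≤ (d : Int) :=
        fD_complete g t M N I hM1' hN1' d K _ hdK hRt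
      have hdI : (d : Int) < I := by
        rw [hI]
        have : d < K := by omega
        exact_mod_cast this
      have heq : fD g t M N I K (M - 1, N - 1) = (d : Int) := by
        rcases fD_sound g t M N I hI0 K (M - 1, N - 1) hMNt with h | ⟨j, _, hv, hR⟩
        · rw [h] at hle ⊢
          omega
        · have hjd : j ≤ d := by
            have := hv ▸ hle
            exact_mod_cast this
          rcases Nat.lt_or_ge j d with hj | hj
          · exact absurd hR (htgt j hj)
          · have : j = d := by omega
            rw [hv, this]
      unfold bOut
      rw [heq, if_pos hdI]
    · rw [if_neg h1]
      have htgt' : ∀ j < d + 1, ¬ Rch g t M N j (M - 1, N - 1) := by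
        intro j hj hR
        rcases Nat.lt_or_ge j d with hjd | hjd
        · exact htgt j hjd hR
        · have hjd' : j = d := by omega
          exact h1 ((hF _).mpr ⟨hjd' ▸ hR, htgt⟩)
      by_cases h2 : F = []
      · rw [if_pos h2]
        rcases d with _ | e
        · exfalso
          have : ((0 : Int), (0 : Int)) ∈ F :=
            (hF _).mpr ⟨Rch_start g t M N 0, by omega⟩
          rw [h2] at this
          simp at this
        · have hst : ∀ c, Rch g t M N (e + 1) c → Rch g t M N e c := by
            intro c hR
            by_cases hRe : Rch g t M N e c
            · exact hRe
            · exfalso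
              have hcF : c ∈ F := (hF c).mpr ⟨hR, by
                intro j hj hRj
                exact hRe (Rch_mono g t M N j e c (by omega) hRj)⟩
              rw [h2] at hcF
              simp at hcF
          exact (unreach_bOut g t M N I hI0 K e hMNt hst (htgt e (by omega))).symm
      · rw [if_neg h2]
        set st := lvlF g t M N consV appA (V, []) F with hst
        obtain ⟨hfst, hsnd⟩ := Rch_expand g t M N d V F hV hF
        have hV' : ∀ x, x ∈ st.1 ↔ Rch g t M N (d + 1) x := by
          intro x
          rw [hst, lvlF_fst_mem g t M N consV appA insSpec_consV insSpec_appA]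
          exact hfst x
        have hF' : ∀ x, x ∈ st.2 ↔
            (Rch g t M N (d + 1) x ∧ ∀ j < d + 1, ¬ Rch g t M N j x) := by
          intro x
          rw [hst, lvlF_snd_mem g t M N consV appA insSpec_consV insSpec_appA]
          simp only [List.not_mem_nil, false_or]
          exact hsnd x
        rcases hG : st.2 with _ | ⟨c, G⟩
        · -- next frontier empty: one more unfold returns 0, and the target is unreachable
          obtain ⟨f'', rfl⟩ : ∃ k, f' = k + 1 := ⟨f' - 1, by omega⟩
          simp only [levelRec]
          rw [if_neg (by simp), if_pos trivial]
          have hst2 : ∀ c, Rch g t M N (d + 1) c → Rch g t M N d c := by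
            intro c hR
            by_cases hRd : Rch g t M N d c
            · exact hRd
            · exfalso
              have : c ∈ st.2 := (hF' c).mpr ⟨hR, by
                intro j hj hRj
                rcases Nat.lt_or_ge j d with hjd | hjd
                · exact hRd (Rch_mono g t M N j d c (by omega) hRj)
                · exact hRd ((by omega : j = d) ▸ hRj)⟩
              rw [hG] at this
              simp at this
          exact (unreach_bOut g t M N I hI0 K d hMNt hst2
            (fun hR => h1 ((hF _).mpr ⟨hR, htgt⟩))).symm
        · have hcm : c ∈ st.2 := by rw [hG]; exact List.mem_cons_self
          have hlt : unvis Mn Nn st.1 < u := by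
            rw [← hu, hst]
            exact lvl_unvis_lt g t M N Mn Nn hM hN consV appA insSpec_consV insSpec_appA
              V F c (hst ▸ hcm)
          have hcast : ((d : Int) + 1) = ((d + 1 : Nat) : Int) := by push_cast; ring
          rw [← hG, hcast]
          exact ih (unvis Mn Nn st.1) hlt st.1 st.2 (d + 1) f' rfl hV' hF' htgt'
            (by omega) (by omega)

-- ======================= port-B ↔ model bridge =======================

theorem getD_map_range {α : Type} (n x : Nat) (f : Nat → α) (d : α) (h : x < n) :
    (((List.range n).map f).getD x d) = f x := by
  rw [List.getD_eq_getElem?_getD]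
  rw [List.getElem?_map]
  rw [List.getElem?_range h]
  rfl

theorem getD_replicate_lt {α : Type} (n i : Nat) (a d : α) (h : i < n) :
    (List.replicate n a).getD i d = a := by
  rw [List.getD_eq_getElem?_getD, List.getElem?_replicate]
  simp [h]

def GoodT (g : List (List Int)) (t M N I : Int) (Mn Nn : Nat) (k : Nat)
    (dist : List (List Int)) : Prop :=
  dist.length = Mn ∧ (∀ row ∈ dist, row.length = Nn) ∧
    ∀ c : Int × Int, inbP M N c → rowGet dist c.1 c.2 = fD g t M N I k c

theorem dpNbrs_eq (x y : Int) :
    [(x - 1, y), (x + 1, y), (x, y - 1), (x, y + 1)] = nbrs (x, y) := by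
  unfold nbrs offsets
  simp only [List.map_cons, List.map_nil]
  rw [show (x + (-1 : Int), y + (0 : Int)) = (x - 1, y) from Prod.ext (by omega) (by omega),
    show (x + (1 : Int), y + (0 : Int)) = (x + 1, y) from Prod.ext (by omega) (by omega),
    show (x + (0 : Int), y + (-1 : Int)) = (x, y - 1) from Prod.ext (by omega) (by omega),
    show (x + (0 : Int), y + (1 : Int)) = (x, y + 1) from Prod.ext (by omega) (by omega)]

theorem dpRelax_eq (dist : List (List Int)) (M N x y : Int) :
    dpRelax dist M N x y
      = relaxF M N (fun n => rowGet dist n.1 n.2) (nbrs (x, y)) (rowGet dist x y) := by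
  unfold dpRelax relaxF
  rw [dpNbrs_eq]

theorem dpRound_get (g : List (List Int)) (t M N I : Int) (Mn Nn : Nat) (k : Nat)
    (hM : M = (Mn : Int)) (hN : N = (Nn : Int))
    (dist : List (List Int)) (hG : GoodT g t M N I Mn Nn k dist)
    (c : Int × Int) (hc : inbP M N c) :
    rowGet (dpRound g dist t Mn Nn) c.1 c.2 = fD g t M N I (k + 1) c := by
  obtain ⟨hx1, hx2, hy1, hy2⟩ := hc
  have hxn : c.1.toNat < Mn := by omega
  have hyn : c.2.toNat < Nn := by omega
  have hcx : ((c.1.toNat : Nat) : Int) = c.1 := by omega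
  have hcy : ((c.2.toNat : Nat) : Int) = c.2 := by omega
  unfold dpRound rowGet
  rw [getD_map_range Mn c.1.toNat _ [] hxn]
  rw [getD_map_range Nn c.2.toNat _ 0 hyn]
  rw [hcx, hcy]
  -- now reduce dpCell to fD's step
  have hfc : rowGet dist c.1 c.2 = fD g t M N I k c := hG.2.2 c ⟨hx1, hx2, hy1, hy2⟩
  unfold dpCell
  rw [fD_succ, ← hM, ← hN]
  by_cases hg : ¬(c.1 = 0 ∧ c.2 = 0) ∧ rowGet g c.1 c.2 ≥ t
  · rw [if_pos hg, if_pos hg, dpRelax_eq]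
    have : (c.1, c.2) = c := rfl
    rw [this]
    refine relaxF_congr M N _ _ _ _ _ ?_ hfc
    intro n _ hn
    exact hG.2.2 n hn
  · rw [if_neg hg, if_neg hg]
    exact hfc

theorem dpRound_good (g : List (List Int)) (t M N I : Int) (Mn Nn : Nat) (k : Nat)
    (hM : M = (Mn : Int)) (hN : N = (Nn : Int))
    (dist : List (List Int)) (hG : GoodT g t M N I Mn Nn k dist) :
    GoodT g t M N I Mn Nn (k + 1) (dpRound g dist t Mn Nn) := by
  refine ⟨by simp [dpRound], ?_, fun c hc => dpRound_get g t M N I Mn Nn k hM hN dist hG c hc⟩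
  intro row hrow
  unfold dpRound at hrow
  obtain ⟨x, _, rfl⟩ := List.mem_map.mp hrow
  simp

theorem dpLoop_corr (g : List (List Int)) (t M N I : Int) (Mn Nn K : Nat)
    (hM : M = (Mn : Int)) (hN : N = (Nn : Int)) :
    ∀ (fuel k : Nat) (dist : List (List Int)), GoodT g t M N I Mn Nn k dist →
      k + fuel = K →
      ∀ c : Int × Int, inbP M N c →
        rowGet (dpLoop g t Mn Nn fuel dist) c.1 c.2 = fD g t M N I K c := by
  intro fuel
  induction fuel with
  | zero =>
    intro k dist hG hk c hc
    have : k = K := by omega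
    subst this
    exact hG.2.2 c hc
  | succ fuel ih =>
    intro k dist hG hk c hc
    simp only [dpLoop]
    by_cases hb : dpRound g dist t Mn Nn = dist
    · rw [if_pos hb]
      -- fixed point: the model is pointwise stable from k on
      have hstab : ∀ c, inbP M N c → fD g t M N I (k + 1) c = fD g t M N I k c := by
        intro c hc
        rw [← dpRound_get g t M N I Mn Nn k hM hN dist hG c hc, hb]
        exact hG.2.2 c hc
      have : fD g t M N I K c = fD g t M N I k c := by
        have := fD_stable_forever g t M N I k hstab (K - k) c hc
        rwa [show k + (K - k) = K by omega] at this
      rw [hG.2.2 c hc]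
      exact this.symm
    · rw [if_neg hb]
      exact ih (k + 1) _ (dpRound_good g t M N I Mn Nn k hM hN dist hG) (by omega) c hc

theorem dist0_good (g : List (List Int)) (t M N I : Int) (Mn Nn : Nat)
    (hM : M = (Mn : Int)) (hN : N = (Nn : Int)) (hM1 : 1 ≤ Mn) (hN1 : 1 ≤ Nn) :
    GoodT g t M N I Mn Nn 0
      ((List.replicate Mn (List.replicate Nn I)).set 0 ((List.replicate Nn I).set 0 0)) := by
  refine ⟨by simp, ?_, ?_⟩
  · intro row hrow
    rcases List.mem_or_eq_of_mem_set hrow with hmem | rfl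
    · rw [List.eq_of_mem_replicate hmem]; simp
    · simp
  · intro c hc
    obtain ⟨hx1, hx2, hy1, hy2⟩ := hc
    rw [fD_zero]
    unfold rowGet
    by_cases hx0 : c.1.toNat = 0
    · rw [hx0, getD_set_eq _ 0 _ [] (by simp; omega)]
      by_cases hy0 : c.2.toNat = 0
      · rw [hy0, getD_set_eq _ 0 _ _ (by simp; omega)]
        rw [if_pos (Prod.ext (by omega) (by omega))]
      · rw [getD_set_ne _ 0 c.2.toNat _ _ (fun h => hy0 h.symm),
          getD_replicate_lt Nn c.2.toNat I 0 (by omega)]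
        rw [if_neg (by
          intro h
          have h1 : c.1 = 0 := congrArg Prod.fst h
          have h2 : c.2 = 0 := congrArg Prod.snd h
          omega)]
    · rw [getD_set_ne _ 0 c.1.toNat _ [] (fun h => hx0 h.symm),
        getD_replicate_lt Mn c.1.toNat _ [] (by omega),
        getD_replicate_lt Nn c.2.toNat I 0 (by omega)]
      rw [if_neg (by
        intro h
        have h1 : c.1 = 0 := congrArg Prod.fst h
        omega)]

-- B's port equals the model's answer
theorem bfs_alt_eq (grid : List (List Int)) (Th : Int) (hM1 : 1 ≤ grid.length)
    (hN1 : 1 ≤ (grid.headI).length) :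
    bfs_alt grid Th
      = bOut grid Th ((grid.length : Int)) (((grid.headI).length : Int))
          ((grid.length : Int) * ((grid.headI).length : Int))
          (grid.length * (grid.headI).length) := by
  set Mn := grid.length with hMn
  set Nn := (grid.headI).length with hNn
  set M : Int := (Mn : Int)
  set N : Int := (Nn : Int)
  set I : Int := M * N
  have hrfl : bfs_alt grid Th
      = (if rowGet (dpLoop grid Th Mn Nn (Mn * Nn)
            ((List.replicate Mn (List.replicate Nn I)).set 0 ((List.replicate Nn I).set 0 0)))
            (M - 1) (N - 1) < I
         then rowGet (dpLoop grid Th Mn Nn (Mn * Nn)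
            ((List.replicate Mn (List.replicate Nn I)).set 0 ((List.replicate Nn I).set 0 0)))
            (M - 1) (N - 1)
         else 0) := rfl
  have htgt : inbP M N ((M - 1 : Int), (N - 1 : Int)) := by
    refine ⟨?_, ?_, ?_, ?_⟩ <;> simp only [M, N] <;> omega
  have hfin : rowGet (dpLoop grid Th Mn Nn (Mn * Nn)
        ((List.replicate Mn (List.replicate Nn I)).set 0 ((List.replicate Nn I).set 0 0)))
        (M - 1) (N - 1) = fD grid Th M N I (Mn * Nn) (M - 1, N - 1) := by
    exact dpLoop_corr grid Th M N I Mn Nn (Mn * Nn) rfl rfl (Mn * Nn) 0 _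
      (dist0_good grid Th M N I Mn Nn rfl rfl hM1 hN1) (by omega) (M - 1, N - 1) htgt
  rw [hrfl, hfin]
  rfl

-- ===== VERDICT (by name: the statement is the Claim_ definition above) =====
theorem bfs_spec : Claim_equal_bfs := by
  intro grid Th _hdom hpre
  unfold Spec_bfs
  obtain ⟨hne, hrow0, _hrows⟩ := hpre
  show bfs grid Th = bfs_alt grid Th
  set Mn := grid.length with hMn
  set Nn := (grid.headI).length with hNn
  have hM1 : 1 ≤ Mn := List.length_pos_iff.mpr hne
  have hN1 : 1 ≤ Nn := List.length_pos_iff.mpr hrow0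
  have hA : bfs grid Th = bfsLoopA grid Th (Mn : Int) (Nn : Int) (Mn * Nn + 3) [(0, 0, 0)]
      (List.replicate Mn (List.replicate Nn false)) := rfl
  have hshape0 : ShapeV Mn Nn (List.replicate Mn (List.replicate Nn false)) := by
    constructor
    · simp
    · intro row hrow
      rw [List.eq_of_mem_replicate hrow]
      simp
  have hrv0 : RV (Mn : Int) (Nn : Int) (List.replicate Mn (List.replicate Nn false)) [] := by
    intro a b _ _ _ _
    rw [get2_replicate]
    simp
  have e1 : bfs grid Th
      = refA grid Th (Mn : Int) (Nn : Int) (Mn * Nn + 3) 0 [] [((0 : Int), (0 : Int))] [] := by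
    rw [hA]
    exact loopA_corr grid Th (Mn : Int) (Nn : Int) Mn Nn rfl rfl (Mn * Nn + 3) 0
      [((0 : Int), (0 : Int))] [] [] (List.replicate Mn (List.replicate Nn false)) hshape0 hrv0
  have e2 : refA grid Th (Mn : Int) (Nn : Int) (Mn * Nn + 3) 0 [] [((0 : Int), (0 : Int))] []
      = levelRec grid Th (Mn : Int) (Nn : Int) (Mn * Nn + 2) 0 [] [((0 : Int), (0 : Int))] := by
    refine refA_to_levelRec grid Th (Mn : Int) (Nn : Int) Mn Nn rfl rfl (unvis Mn Nn []) [] []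
      [((0 : Int), (0 : Int))] 0 (Mn * Nn + 3) (Mn * Nn + 2) rfl (fun x => Iff.rfl) ?_ ?_
    · rw [unvis_nil]
      simp only [List.length_cons, List.length_nil]
      omega
    · rw [unvis_nil]
  have hBout : bfs_alt grid Th
      = bOut grid Th ((Mn : Int)) ((Nn : Int)) ((Mn : Int) * (Nn : Int)) (Mn * Nn) :=
    bfs_alt_eq grid Th hM1 hN1
  have hstart_univ : ((0 : Int), (0 : Int)) ∈ univ Mn Nn := by
    rw [mem_univ_iff]
    refine ⟨le_refl 0, ?_, le_refl 0, ?_⟩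
    · show (0 : Int) < (Mn : Int)
      exact_mod_cast hM1
    · show (0 : Int) < (Nn : Int)
      exact_mod_cast hN1
  have hu_lt : unvis Mn Nn [((0 : Int), (0 : Int))] < Mn * Nn := by
    have := unvis_lt Mn Nn [] [((0 : Int), (0 : Int))]
      (fun x hx => by simp at hx) ((0 : Int), (0 : Int)) hstart_univ (by simp) (by simp)
    rwa [unvis_nil] at this
  by_cases hMN : Mn = 1 ∧ Nn = 1
  · -- 1×1 grid: both sides are 0 immediately
    have htgt0 : (((Mn : Int) - 1, (Nn : Int) - 1) : Int × Int) = (0, 0) := by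
      have h1 : (Mn : Int) = 1 := by exact_mod_cast hMN.1
      have h2 : (Nn : Int) = 1 := by exact_mod_cast hMN.2
      exact Prod.ext (by omega) (by omega)
    have hL : levelRec grid Th (Mn : Int) (Nn : Int) (Mn * Nn + 2) 0 []
        [((0 : Int), (0 : Int))] = 0 := by
      have : Mn * Nn + 2 = (Mn * Nn + 1) + 1 := rfl
      rw [this]
      simp only [levelRec]
      rw [if_pos (by rw [htgt0]; exact List.mem_cons_self)]
    have hB0 : bOut grid Th ((Mn : Int)) ((Nn : Int)) ((Mn : Int) * (Nn : Int)) (Mn * Nn) = 0 := by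
      unfold bOut
      rw [htgt0, fD_start]
      rw [if_pos (by
        have h1 : (Mn : Int) = 1 := by exact_mod_cast hMN.1
        have h2 : (Nn : Int) = 1 := by exact_mod_cast hMN.2
        rw [h1, h2]
        omega)]
    rw [e1, e2, hL, hBout, hB0]
  · have hts : (((Mn : Int) - 1, (Nn : Int) - 1) : Int × Int) ≠ (0, 0) := by
      intro h
      have h1 : (Mn : Int) - 1 = 0 := congrArg Prod.fst h
      have h2 : (Nn : Int) - 1 = 0 := congrArg Prod.snd h
      exact hMN ⟨by omega, by omega⟩
    have e4 : levelRec grid Th (Mn : Int) (Nn : Int) (Mn * Nn + 2) 0 [] [((0 : Int), (0 : Int))]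
        = levelRec grid Th (Mn : Int) (Nn : Int) (Mn * Nn + 2) 0
            [((0 : Int), (0 : Int))] [((0 : Int), (0 : Int))] := by
      refine levelRec_start grid Th (Mn : Int) (Nn : Int) Mn Nn rfl rfl hts (unvis Mn Nn [])
        [] [((0 : Int), (0 : Int))] [((0 : Int), (0 : Int))] [((0 : Int), (0 : Int))] 0
        (Mn * Nn + 2) (Mn * Nn + 2) rfl ?_ (fun x _ => Iff.rfl) (fun h => h) ?_ ?_ ?_
      · intro x
        simp
      · intro h
        exact absurd List.mem_cons_self h
      · rw [unvis_nil]
      · rw [unvis_nil]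
    have e5 : levelRec grid Th (Mn : Int) (Nn : Int) (Mn * Nn + 2) ((0 : Nat) : Int)
        [((0 : Int), (0 : Int))] [((0 : Int), (0 : Int))]
        = bOut grid Th ((Mn : Int)) ((Nn : Int)) ((Mn : Int) * (Nn : Int)) (Mn * Nn) := by
      refine levelRec_dist grid Th (Mn : Int) (Nn : Int) ((Mn : Int) * (Nn : Int)) Mn Nn (Mn * Nn)
        rfl rfl rfl (by push_cast; ring) hM1 hN1 (unvis Mn Nn [((0 : Int), (0 : Int))])
        [((0 : Int), (0 : Int))] [((0 : Int), (0 : Int))] 0 (Mn * Nn + 2) rfl ?_ ?_ ?_ ?_ ?_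
      · intro x
        show x ∈ [((0 : Int), (0 : Int))] ↔ Rch grid Th (Mn : Int) (Nn : Int) 0 x
        simp only [List.mem_singleton]
        exact Iff.rfl
      · intro x
        simp only [List.mem_singleton]
        constructor
        · intro h
          exact ⟨h ▸ Rch_start grid Th (Mn : Int) (Nn : Int) 0, by omega⟩
        · rintro ⟨h, _⟩
          exact h
      · intro j hj
        omega
      · omega
      · omega
    rw [e1, e2, e4, hBout, ← e5]
    norm_num
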